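-- pv_equiv track=rewrite | github.com/TengFeiyang01/Algorithm | bishi/9-28网易/3.py | getFinalPrice1
-- ===== SOURCE A (Python) =====
-- class SegmentTree:
--     def __init__(self, prices):
--         self.n = len(prices)
--         self.tree = [0] * (4 * self.n)
--         self.lazy = [0] * (4 * self.n)
--         self.build(prices, 0, 0, self.n - 1)
--
--     def build(self, prices, node, start, end):
--         if start == end:
--             self.tree[node] = prices[start]
--         else:
--             mid = (start + end) // 2
--             self.build(prices, 2 * node + 1, start, mid)
--             self.build(prices, 2 * node + 2, mid + 1, end)
--             self.tree[node] = min(self.tree[2 * node + 1], self.tree[2 * node + 2])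
--
--     def update(self, idx, value, node, start, end):
--         self.apply_lazy(node, start, end)
--         if start == end:
--             self.tree[node] = value
--         else:
--             mid = (start + end) // 2
--             if start <= idx <= mid:
--                 self.update(idx, value, 2 * node + 1, start, mid)
--             else:
--                 self.update(idx, value, 2 * node + 2, mid + 1, end)
--             self.tree[node] = min(self.tree[2 * node + 1], self.tree[2 * node + 2])
--
--     def range_update(self, value, node, start, end):
--         if start != end:
--             self.lazy[node] = max(self.lazy[node], value)
--             self.tree[node] = max(self.tree[node], value)
--
--     def apply_lazy(self, node, start, end):
--         if self.lazy[node] > 0: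
--             self.tree[node] = max(self.tree[node], self.lazy[node])
--             if start != end:
--                 self.lazy[2 * node + 1] = max(self.lazy[2 * node + 1], self.lazy[node])
--                 self.lazy[2 * node + 2] = max(self.lazy[2 * node + 2], self.lazy[node])
--             self.lazy[node] = 0
--
--     def update_price(self, idx, value):
--         self.update(idx, value, 0, 0, self.n - 1)
--
--     def update_min(self, value):
--         self.range_update(value, 0, 0, self.n - 1)
--
--     def get_price(self, idx):
--         return self.get_price_util(idx, 0, 0, self.n - 1)
--
--     def get_price_util(self, idx, node, start, end):
--         self.apply_lazy(node, start, end)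
--         if start == end:
--             return self.tree[node]
--         else:
--             mid = (start + end) // 2
--             if start <= idx <= mid:
--                 return self.get_price_util(idx, 2 * node + 1, start, mid)
--             else:
--                 return self.get_price_util(idx, 2 * node + 2, mid + 1, end)
--
--     def get_prices(self):
--         return [self.get_price_util(i, 0, 0, self.n - 1) for i in range(self.n)]
--
-- def getFinalPrice1(price, queries):
--     segment_tree = SegmentTree(price)
--
--     for query in queries:
--         if query[0] == 1:
--             x, v = query[1] - 1, query[2]  # x为1基索引
--             segment_tree.update_price(x, v)
--         elif query[0] == 2:
--             v = query[1]
--             segment_tree.update_min(v)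
--
--     return segment_tree.get_prices()
-- ===== SOURCE B (Python) =====
-- def getFinalPrice1(price, queries):
--     # One reverse pass: record each index's last point-set combined with the
--     # running max of floor values seen later; unset indices take max(price, floor).
--     n = len(price)
--     res = [None] * n
--     floor = None
--     for q in reversed(queries):
--         if q[0] == 1:
--             i = q[1] - 1
--             if res[i] is None:
--                 res[i] = q[2] if floor is None else max(q[2], floor)
--         elif q[0] == 2:
--             floor = q[1] if floor is None else max(floor, q[1])
--     return [(price[i] if floor is None else max(price[i], floor)) if res[i] is None
--             else res[i] for i in range(n)]
-- ===== Notes on version B (the rewrite author's own statement) =====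
-- stated objective: faster
-- what changed: Replaced the lazy segment tree (build + per-query O(log n) point updates / range-max updates + per-element O(log n) reads) by a single O(n+q) reverse pass that records each index's last point-set combined with a running suffix maximum of floor values.
-- intended difference: When price has a single element and some floor query [2,v] is not followed by any point-set and v exceeds the last point-set value (or the initial price if there is none), A ignores the floor entirely (its range_update no-ops when start==end) and returns the un-floored value, while B applies the floor as intended. — e.g. on getFinalPrice1([3], [[2, 10]]): A returns [3], B returns [10]
-- outside the precondition, e.g. on getFinalPrice1([-5, 6], [[2, -3]]): A returns [-5, 6], B returns [-3, 6]; on getFinalPrice1([5, 6], [[1, 5, 9]]): A returns [5, 9], B raises IndexError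
import Mathlib
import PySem

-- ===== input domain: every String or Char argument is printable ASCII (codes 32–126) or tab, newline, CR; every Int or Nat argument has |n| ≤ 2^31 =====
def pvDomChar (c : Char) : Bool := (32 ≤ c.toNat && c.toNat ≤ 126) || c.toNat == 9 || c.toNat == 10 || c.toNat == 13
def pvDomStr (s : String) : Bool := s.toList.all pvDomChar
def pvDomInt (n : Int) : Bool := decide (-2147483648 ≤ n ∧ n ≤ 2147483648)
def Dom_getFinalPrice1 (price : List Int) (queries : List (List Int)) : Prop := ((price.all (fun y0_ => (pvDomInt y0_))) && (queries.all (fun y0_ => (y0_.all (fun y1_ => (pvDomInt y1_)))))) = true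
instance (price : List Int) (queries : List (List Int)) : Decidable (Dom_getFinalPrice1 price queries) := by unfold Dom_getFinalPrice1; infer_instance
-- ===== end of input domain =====

-- B replaces A's lazy segment tree by a single reverse pass over the queries (last point-set
-- per index combined with a suffix max of floor values); proved equal on the natural domain
-- (nonempty price, well-formed queries with in-range 1-based indices and positive floors),
-- except the stated n==1 corner where A drops floors and B applies them.


-- ===== PORT A =====
-- SegmentTree helpers; Python list accesses raise on out-of-range indices — under Pre_ every
-- index below is in range, so the total List.set/List.getD/pyGetD forms are exact there.
-- Python's unbounded recursion is rendered with fuel (n is enough: the range shrinks each level);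
-- fuel 0 is only reachable for empty price, which Pre_ excludes (Python recurses forever there).
def pvBuild (prices : List Int) (fuel : Nat) (node : Nat) (start e : Int) (tree : List Int) : List Int :=
  match fuel with
  | 0 => tree
  | fuel + 1 =>
    if start = e then
      tree.set node (PySem.List.pyGetD prices start 0)
    else
      let mid := PySem.Int.floordiv (start + e) 2
      let tree := pvBuild prices fuel (2*node+1) start mid tree
      let tree := pvBuild prices fuel (2*node+2) (mid+1) e tree
      tree.set node (min (tree.getD (2*node+1) 0) (tree.getD (2*node+2) 0))

def pvApplyLazy (node : Nat) (start e : Int) (tree lz : List Int) : List Int × List Int :=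
  if 0 < lz.getD node 0 then
    let tree' := tree.set node (max (tree.getD node 0) (lz.getD node 0))
    let lz' :=
      if start ≠ e then
        let lz1 := lz.set (2*node+1) (max (lz.getD (2*node+1) 0) (lz.getD node 0))
        lz1.set (2*node+2) (max (lz1.getD (2*node+2) 0) (lz1.getD node 0))
      else lz
    (tree', lz'.set node 0)
  else (tree, lz)

def pvUpdate (idx v : Int) (fuel : Nat) (node : Nat) (start e : Int) (tree lz : List Int) :
    List Int × List Int :=
  match fuel with
  | 0 => (tree, lz)
  | fuel + 1 =>
    let p := pvApplyLazy node start e tree lz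
    if start = e then (p.1.set node v, p.2)
    else
      let mid := PySem.Int.floordiv (start + e) 2
      let p2 :=
        if start ≤ idx ∧ idx ≤ mid then pvUpdate idx v fuel (2*node+1) start mid p.1 p.2
        else pvUpdate idx v fuel (2*node+2) (mid+1) e p.1 p.2
      (p2.1.set node (min (p2.1.getD (2*node+1) 0) (p2.1.getD (2*node+2) 0)), p2.2)

def pvRangeUpdate (v : Int) (node : Nat) (start e : Int) (tree lz : List Int) :
    List Int × List Int :=
  if start ≠ e then
    (tree.set node (max (tree.getD node 0) v), lz.set node (max (lz.getD node 0) v))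
  else (tree, lz)

def pvGetUtil (idx : Int) (fuel : Nat) (node : Nat) (start e : Int) (tree lz : List Int) :
    Int × List Int × List Int :=
  match fuel with
  | 0 => (0, tree, lz)
  | fuel + 1 =>
    let p := pvApplyLazy node start e tree lz
    if start = e then (p.1.getD node 0, p.1, p.2)
    else
      let mid := PySem.Int.floordiv (start + e) 2
      if start ≤ idx ∧ idx ≤ mid then pvGetUtil idx fuel (2*node+1) start mid p.1 p.2
      else pvGetUtil idx fuel (2*node+2) (mid+1) e p.1 p.2

def pvReadStep (n fuel : Nat) (acc : List Int × List Int × List Int) (i : Nat) :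
    List Int × List Int × List Int :=
  let r := pvGetUtil (i : Int) fuel 0 0 ((n : Int) - 1) acc.2.1 acc.2.2
  (acc.1 ++ [r.1], r.2.1, r.2.2)

def pvGetPrices (n fuel : Nat) (tree lz : List Int) : List Int :=
  ((List.range n).foldl (pvReadStep n fuel) ([], tree, lz)).1

-- one iteration of A's query loop
def pvDoQuery (n : Nat) (st : List Int × List Int) (q : List Int) : List Int × List Int :=
  if PySem.List.pyGetD q 0 0 = 1 then
    pvUpdate (PySem.List.pyGetD q 1 0 - 1) (PySem.List.pyGetD q 2 0) n 0 0 ((n : Int) - 1)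
      st.1 st.2
  else if PySem.List.pyGetD q 0 0 = 2 then
    pvRangeUpdate (PySem.List.pyGetD q 1 0) 0 0 ((n : Int) - 1) st.1 st.2
  else st

def getFinalPrice1 (price : List Int) (queries : List (List Int)) : List Int :=
  let n := price.length
  let tree0 := pvBuild price n 0 0 ((n : Int) - 1) (List.replicate (4*n) 0)
  let st := queries.foldl (pvDoQuery n) (tree0, List.replicate (4*n) 0)
  pvGetPrices n n st.1 st.2

-- ===== PORT B =====
-- one iteration of B's reverse loop over the queries
def pvAltStep (n : Nat) (st : List (Option Int) × Option Int) (q : List Int) :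
    List (Option Int) × Option Int :=
  if PySem.List.pyGetD q 0 0 = 1 then
    let i := PySem.List.pyGetD q 1 0 - 1
    -- Python list index: negative wraps, out-of-range raises (excluded by Pre_)
    let j := (if i < 0 then i + (n : Int) else i).toNat
    match st.1.getD j none with
    | none =>
      let w := match st.2 with
        | none => PySem.List.pyGetD q 2 0
        | some f => max (PySem.List.pyGetD q 2 0) f
      (st.1.set j (some w), st.2)
    | some _ => st
  else if PySem.List.pyGetD q 0 0 = 2 then
    (st.1, some (match st.2 with
      | none => PySem.List.pyGetD q 1 0
      | some f => max f (PySem.List.pyGetD q 1 0)))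
  else st

def getFinalPrice1_alt (price : List Int) (queries : List (List Int)) : List Int :=
  let n := price.length
  let st := queries.reverse.foldl (pvAltStep n) (List.replicate n none, none)
  (List.range n).map (fun i =>
    match st.1.getD i none with
    | some r => r
    | none => match st.2 with
      | none => price.getD i 0
      | some f => max (price.getD i 0) f)

-- ===== PRECONDITION & SPEC =====
-- Pre_ restricts to the natural domain of the problem: nonempty price, and well-formed queries
-- (a nonempty query list per query; a point-set [1,x,v] has its 1-based index x in [1,n]; a
-- floor query [2,v] has a positive floor v).  Outside it A raises (empty price: infinite
-- recursion; short query lists: IndexError), or the corner is accidental on both sides: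
-- an out-of-range 1-based index makes A silently overwrite the LAST element while B raises
-- IndexError or wraps, and a non-positive floor is dropped by A's `lazy > 0` guard while B
-- applies it — the problem's floors are positive, so neither value is specified.
def Pre_getFinalPrice1 (price : List Int) (queries : List (List Int)) : Prop :=
  price ≠ [] ∧ ∀ q ∈ queries, q ≠ [] ∧
    (PySem.List.pyGetD q 0 0 = 1 →
      3 ≤ q.length ∧ 1 ≤ PySem.List.pyGetD q 1 0 ∧
        PySem.List.pyGetD q 1 0 ≤ (price.length : Int)) ∧
    (PySem.List.pyGetD q 0 0 = 2 → 2 ≤ q.length ∧ 1 ≤ PySem.List.pyGetD q 1 0)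

instance (price : List Int) (queries : List (List Int)) :
    Decidable (Pre_getFinalPrice1 price queries) := by
  unfold Pre_getFinalPrice1; infer_instance

def pvWitness_getFinalPrice1 : List Int × List (List Int) :=
  ([5, 7], [[1, 2, 3], [2, 6]])

-- When price has a single element and some floor query [2,v] is not followed by any
-- point-set and v exceeds the last point-set value (or the initial price if there is no
-- point-set), A returns the value with the floor dropped (its range_update no-ops on a
-- single node) and B returns the floored value (the intended one).
def D_getFinalPrice1 (price : List Int) (queries : List (List Int)) : Prop :=
  price.length = 1 ∧ ∃ i < queries.length, queries[i]!.getD 0 0 = 2 ∧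
    (∀ p ∈ queries.drop (i+1), p.getD 0 0 ≠ 1) ∧
    ((queries.filter (·.getD 0 0 == 1)).map (·.getD 2 0)).getLastD (price.getD 0 0) <
      queries[i]!.getD 1 0

instance (price : List Int) (queries : List (List Int)) :
    Decidable (D_getFinalPrice1 price queries) := by
  unfold D_getFinalPrice1; infer_instance

def Spec_getFinalPrice1 (price : List Int) (queries : List (List Int)) (out : List Int) : Prop :=
  ¬ D_getFinalPrice1 price queries → out = getFinalPrice1_alt price queries

instance (price : List Int) (queries : List (List Int)) (out : List Int) :
    Decidable (Spec_getFinalPrice1 price queries out) := by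
  unfold Spec_getFinalPrice1; infer_instance

def pvDiffWitness_getFinalPrice1 : List Int × List (List Int) := ([3], [[2, 10]])

def pvDiffWitnessOut_getFinalPrice1 : (List Int) × (List Int) := ([3], [10])

-- ===== CLAIM =====
def Claim_unchanged_getFinalPrice1 : Prop :=
  ∀ (price : List Int) (queries : List (List Int)), Dom_getFinalPrice1 price queries →
    Pre_getFinalPrice1 price queries →
    Spec_getFinalPrice1 price queries (getFinalPrice1 price queries)

def Claim_exact_getFinalPrice1 : Prop :=
  ∀ (price : List Int) (queries : List (List Int)), Dom_getFinalPrice1 price queries →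
    Pre_getFinalPrice1 price queries → D_getFinalPrice1 price queries →
    getFinalPrice1 price queries ≠ getFinalPrice1_alt price queries

def Claim_changed_getFinalPrice1 : Prop :=
  Dom_getFinalPrice1 (pvDiffWitness_getFinalPrice1.1) (pvDiffWitness_getFinalPrice1.2) ∧
  Pre_getFinalPrice1 (pvDiffWitness_getFinalPrice1.1) (pvDiffWitness_getFinalPrice1.2) ∧
  D_getFinalPrice1 (pvDiffWitness_getFinalPrice1.1) (pvDiffWitness_getFinalPrice1.2) ∧
  getFinalPrice1 (pvDiffWitness_getFinalPrice1.1) (pvDiffWitness_getFinalPrice1.2) =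
    pvDiffWitnessOut_getFinalPrice1.1 ∧
  getFinalPrice1_alt (pvDiffWitness_getFinalPrice1.1) (pvDiffWitness_getFinalPrice1.2) =
    pvDiffWitnessOut_getFinalPrice1.2 ∧
  pvDiffWitnessOut_getFinalPrice1.1 ≠ pvDiffWitnessOut_getFinalPrice1.2

-- ===== LEMMAS AND PROOFS =====

-- pointwise facts about List.set / List.getD
theorem pv_getD_set_ne (l : List Int) (i j : Nat) (v : Int) (h : i ≠ j) :
    (l.set i v).getD j 0 = l.getD j 0 := by
  simp [List.getD, List.getElem?_set_ne h]

theorem pv_getD_set_self (l : List Int) (i : Nat) (v : Int) (h : i < l.length) :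
    (l.set i v).getD i 0 = v := by
  simp [List.getD, h]

theorem pv_range_map_getD (l : List Int) :
    (List.range l.length).map (fun k => l.getD k 0) = l := by
  apply List.ext_getElem
  · simp
  · intro i h1 h2
    simp [List.getD, h2]

theorem pv_set_len_one (l : List Int) (v : Int) (h : l.length = 1) : l.set 0 v = [v] := by
  match l, h with | [a], _ => rfl

-- the "effective max" a pending lazy value applies (A only applies a lazy when it is > 0)
def pvGmax (l x : Int) : Int := if 0 < l then max x l else x

theorem pvGmax_nonpos (l x : Int) (h : ¬ 0 < l) : pvGmax l x = x := by simp [pvGmax, h]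

theorem pvGmax_comp (c l x : Int) (hc : 0 ≤ c) (hl : 0 ≤ l) :
    pvGmax l (pvGmax c x) = pvGmax (max c l) x := by
  rcases le_total c l with h | h
  · rw [max_eq_right h]
    by_cases hc1 : 0 < c
    · have hl1 : 0 < l := lt_of_lt_of_le hc1 h
      simp only [pvGmax, if_pos hc1, if_pos hl1]
      rw [max_assoc, max_eq_right h]
    · simp only [pvGmax, if_neg hc1]
  · rw [max_eq_left h]
    by_cases hl1 : 0 < l
    · have hc1 : 0 < c := lt_of_lt_of_le hl1 h
      simp only [pvGmax, if_pos hc1, if_pos hl1]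
      rw [max_eq_left (le_trans h (le_max_right x c))]
    · simp only [pvGmax, if_neg hl1]

theorem pvGmax_pos (l x : Int) (h : 0 < l) : pvGmax l x = max x l := by simp [pvGmax, h]

-- node j lies in the subtree rooted at n (heap indexing: children of v are 2v+1, 2v+2)
def pvIsDesc (n j : Nat) : Bool :=
  if j = n then true else if j = 0 then false else pvIsDesc n ((j - 1) / 2)
termination_by j
decreasing_by omega

theorem pvIsDesc_self (n : Nat) : pvIsDesc n n = true := by
  unfold pvIsDesc; simp

theorem pvIsDesc_le (n : Nat) : ∀ j, pvIsDesc n j = true → n ≤ j := by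
  intro j
  induction j using Nat.strong_induction_on with
  | _ j ih =>
    intro h
    unfold pvIsDesc at h
    by_cases h1 : j = n
    · omega
    · simp only [h1, if_false] at h
      by_cases h0 : j = 0
      · simp [h0] at h
      · simp only [h0, if_false] at h
        have := ih ((j - 1) / 2) (by omega) h
        omega

theorem pvIsDesc_trans (a b : Nat) : ∀ c, pvIsDesc b c = true → pvIsDesc a b = true →
    pvIsDesc a c = true := by
  intro c
  induction c using Nat.strong_induction_on with
  | _ c ih =>
    intro hbc hab
    unfold pvIsDesc at hbc
    by_cases h1 : c = b
    · subst h1; exact hab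
    · simp only [h1, if_false] at hbc
      by_cases h0 : c = 0
      · simp [h0] at hbc
      · simp only [h0, if_false] at hbc
        have hrec := ih ((c - 1) / 2) (by omega) hbc hab
        unfold pvIsDesc
        by_cases hca : c = a
        · simp [hca]
        · simp [hca, h0, hrec]

theorem pvIsDesc_left (n : Nat) : pvIsDesc n (2*n+1) = true := by
  unfold pvIsDesc
  have h1 : ¬ (2*n+1 = n) := by omega
  have h2 : ¬ (2*n+1 = 0) := by omega
  have h3 : (2*n+1-1)/2 = n := by omega
  have h4 : (2*n)/2 = n := by omega
  simp [h1, h2, h3, h4, pvIsDesc_self]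

theorem pvIsDesc_right (n : Nat) : pvIsDesc n (2*n+2) = true := by
  unfold pvIsDesc
  have h1 : ¬ (2*n+2 = n) := by omega
  have h2 : ¬ (2*n+2 = 0) := by omega
  have h3 : (2*n+2-1)/2 = n := by omega
  have h4 : (2*n+1)/2 = n := by omega
  simp [h1, h2, h3, h4, pvIsDesc_self]

theorem pvIsDesc_of_left (n : Nat) (j : Nat) (h : pvIsDesc (2*n+1) j = true) :
    pvIsDesc n j = true := pvIsDesc_trans n (2*n+1) j h (pvIsDesc_left n)

theorem pvIsDesc_of_right (n : Nat) (j : Nat) (h : pvIsDesc (2*n+2) j = true) :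
    pvIsDesc n j = true := pvIsDesc_trans n (2*n+2) j h (pvIsDesc_right n)

theorem pvIsDesc_disjoint (n : Nat) : ∀ j, pvIsDesc (2*n+1) j = true →
    pvIsDesc (2*n+2) j = true → False := by
  intro j
  induction j using Nat.strong_induction_on with
  | _ j ih =>
    intro hl hr
    by_cases h1 : j = 2*n+1
    · subst h1; have := pvIsDesc_le (2*n+2) _ hr; omega
    · by_cases h2 : j = 2*n+2
      · subst h2
        unfold pvIsDesc at hl
        have hx : ¬ (2*n+2 = 2*n+1) := by omega
        have h0 : ¬ (2*n+2 = 0) := by omega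
        simp only [hx, h0, if_false] at hl
        have h3 : (2*n+2-1)/2 = n := by omega
        rw [h3] at hl
        have := pvIsDesc_le (2*n+1) _ hl; omega
      · by_cases h0 : j = 0
        · subst h0; unfold pvIsDesc at hl
          have : ¬ ((0:Nat) = 2*n+1) := by omega
          simp [this] at hl
        · unfold pvIsDesc at hl hr
          simp only [h1, h2, h0, if_false] at hl hr
          exact ih ((j-1)/2) (by omega) hl hr

theorem pvIsDesc_not_node_left (n : Nat) : pvIsDesc (2*n+1) n = false := by
  by_contra h
  have := pvIsDesc_le (2*n+1) n (by revert h; cases pvIsDesc (2*n+1) n <;> simp)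
  omega

theorem pvIsDesc_not_node_right (n : Nat) : pvIsDesc (2*n+2) n = false := by
  by_contra h
  have := pvIsDesc_le (2*n+2) n (by revert h; cases pvIsDesc (2*n+2) n <;> simp)
  omega

-- the values A's reads observe at the leaves of the subtree at `node` over [start, e]
def pvVals (fuel : Nat) (node : Nat) (start e : Int) (t z : List Int) : List Int :=
  match fuel with
  | 0 => []
  | fuel + 1 =>
    if start = e then [pvGmax (z.getD node 0) (t.getD node 0)]
    else
      let mid := PySem.Int.floordiv (start + e) 2
      ((pvVals fuel (2*node+1) start mid t z) ++ (pvVals fuel (2*node+2) (mid+1) e t z)).map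
        (pvGmax (z.getD node 0))

theorem pv_mid (start e : Int) (hse : start ≤ e) :
    PySem.Int.floordiv (start + e) 2 = (start + e) / 2 :=
  PySem.Int.floordiv_eq_ediv_of_pos (by omega)

theorem pvVals_congr (fuel : Nat) : ∀ (node : Nat) (start e : Int) (t z t' z' : List Int),
    (∀ j, pvIsDesc node j = true → t.getD j 0 = t'.getD j 0) →
    (∀ j, pvIsDesc node j = true → z.getD j 0 = z'.getD j 0) →
    pvVals fuel node start e t z = pvVals fuel node start e t' z' := by
  induction fuel with
  | zero => intro _ _ _ _ _ _ _ _ _; rfl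
  | succ fuel ih =>
    intro node start e t z t' z' ht hz
    unfold pvVals
    by_cases hse : start = e
    · simp only [hse, if_true, eq_self_iff_true]
      rw [ht node (pvIsDesc_self node), hz node (pvIsDesc_self node)]
    · simp only [hse, if_neg, ite_false]
      rw [hz node (pvIsDesc_self node),
        ih (2*node+1) start _ t z t' z'
          (fun j hj => ht j (pvIsDesc_of_left node j hj))
          (fun j hj => hz j (pvIsDesc_of_left node j hj)),
        ih (2*node+2) _ e t z t' z'
          (fun j hj => ht j (pvIsDesc_of_right node j hj))
          (fun j hj => hz j (pvIsDesc_of_right node j hj))]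

theorem pvVals_len (fuel : Nat) : ∀ (node : Nat) (start e : Int) (t z : List Int),
    0 ≤ start → start ≤ e → (e - start).toNat < fuel →
    (pvVals fuel node start e t z).length = (e - start + 1).toNat := by
  induction fuel with
  | zero => intro _ _ _ _ _ _ _ h; omega
  | succ fuel ih =>
    intro node start e t z h0 hse hf
    unfold pvVals
    by_cases he : start = e
    · simp [he]
    · have hlt : start < e := lt_of_le_of_ne hse he
      rw [pv_mid start e hse]
      have hm1 : start ≤ (start + e) / 2 := by omega
      have hm2 : (start + e) / 2 < e := by omega
      simp only [he, ite_false, List.length_map, List.length_append]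
      rw [ih (2*node+1) start ((start+e)/2) t z h0 hm1 (by omega),
        ih (2*node+2) ((start+e)/2+1) e t z (by omega) (by omega) (by omega)]
      omega

theorem pvVals_bump (fuel : Nat) (node : Nat) (start e : Int) (t z : List Int) (l : Int)
    (h0 : 0 ≤ start) (hse : start ≤ e) (hf : (e - start).toNat < fuel)
    (hl : 0 ≤ l) (hnode : node < z.length) (hzn : 0 ≤ z.getD node 0) :
    pvVals fuel node start e t (z.set node (max (z.getD node 0) l)) =
      (pvVals fuel node start e t z).map (pvGmax l) := by
  match fuel with
  | 0 => omega
  | fuel + 1 =>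
    unfold pvVals
    by_cases he : start = e
    · simp only [he, if_true, eq_self_iff_true, List.map_cons, List.map_nil]
      rw [pv_getD_set_self z node _ hnode, pvGmax_comp _ _ _ hzn hl]
    · simp only [he, ite_false]
      rw [pv_getD_set_self z node _ hnode]
      rw [pvVals_congr fuel (2*node+1) _ _ t (z.set node (max (z.getD node 0) l)) t z
          (fun j _ => rfl)
          (fun j hj => pv_getD_set_ne z node j _ (by
            intro hh; subst hh; rw [pvIsDesc_not_node_left node] at hj; simp at hj)),
        pvVals_congr fuel (2*node+2) _ _ t (z.set node (max (z.getD node 0) l)) t z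
          (fun j _ => rfl)
          (fun j hj => pv_getD_set_ne z node j _ (by
            intro hh; subst hh; rw [pvIsDesc_not_node_right node] at hj; simp at hj))]
      rw [List.map_map]
      apply List.map_congr_left
      intro x _
      exact (pvGmax_comp _ _ _ hzn hl).symm

-- node-index invariant: at a node over [start, e] inside a tree of N leaves all array
-- accesses of A stay below 4*N
def pvOK (N node : Nat) (start e : Int) : Prop :=
  ∃ d : Nat, node + 2 ≤ 2^(d+1) ∧ (e - start) * 2^d ≤ (N : Int) - 1 ∧ node < 4*N

theorem pvOK_root (N : Nat) (hN : 1 ≤ N) : pvOK N 0 0 ((N : Int) - 1) := by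
  refine ⟨0, by norm_num, by simp, by omega⟩

theorem pvOK_step (N node : Nat) (start e : Int) (hOK : pvOK N node start e)
    (hlt : start < e) :
    (2*node+2 < 4*N) ∧ pvOK N (2*node+1) start ((start + e)/2) ∧
      pvOK N (2*node+2) ((start + e)/2 + 1) e := by
  obtain ⟨d, hd1, hd2, hd3⟩ := hOK
  have hone : (1 : Int) ≤ e - start := by omega
  have h2d : ((2:Int)^d) ≤ (N : Int) - 1 := by
    calc ((2:Int)^d) = 1 * 2^d := by ring
    _ ≤ (e - start) * 2^d := by
        apply mul_le_mul_of_nonneg_right hone (by positivity)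
    _ ≤ (N : Int) - 1 := hd2
  have h2dn : (2:Nat)^d ≤ N - 1 := by
    have hcast : ((2:Int))^d = ((2^d : Nat) : Int) := by push_cast; ring
    rw [hcast] at h2d
    omega
  have hbound : 2*node+2 < 4*N := by
    have : node + 2 ≤ 2^(d+1) := hd1
    have h4 : (2:Nat)^(d+1) = 2 * 2^d := by ring
    omega
  have hm1 : start ≤ (start + e) / 2 := by omega
  have hm2 : (start + e) / 2 < e := by omega
  have hml : ((start + e)/2 - start) * 2 ≤ e - start := by omega
  have hmr : (e - ((start + e)/2 + 1)) * 2 ≤ e - start := by omega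
  refine ⟨hbound, ⟨d+1, by
      have h4 : (2:Nat)^(d+2) = 2 * 2^(d+1) := by ring
      omega, ?_, by omega⟩, ⟨d+1, by
      have h4 : (2:Nat)^(d+2) = 2 * 2^(d+1) := by ring
      omega, ?_, by omega⟩⟩
  · calc ((start + e)/2 - start) * 2^(d+1) = (((start + e)/2 - start) * 2) * 2^d := by ring
    _ ≤ (e - start) * 2^d := mul_le_mul_of_nonneg_right hml (by positivity)
    _ ≤ (N : Int) - 1 := hd2
  · calc (e - ((start + e)/2 + 1)) * 2^(d+1) = ((e - ((start + e)/2 + 1)) * 2) * 2^d := by ring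
    _ ≤ (e - start) * 2^d := mul_le_mul_of_nonneg_right hmr (by positivity)
    _ ≤ (N : Int) - 1 := hd2

theorem pvOK_node_lt (N node : Nat) (start e : Int) (hOK : pvOK N node start e) :
    node < 4*N := hOK.choose_spec.2.2

theorem pvApplyLazy_spec (N node : Nat) (start e : Int) (t z : List Int)
    (ht : t.length = 4*N) (hz : z.length = 4*N)
    (hOK : pvOK N node start e) (h0 : 0 ≤ start) (hse : start ≤ e)
    (hNN : ∀ j, 0 ≤ z.getD j 0) :
    (pvApplyLazy node start e t z).1.length = 4*N ∧
    (pvApplyLazy node start e t z).2.length = 4*N ∧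
    (∀ j, 0 ≤ (pvApplyLazy node start e t z).2.getD j 0) ∧
    (pvApplyLazy node start e t z).2.getD node 0 = 0 ∧
    (∀ j, pvIsDesc node j = false →
      (pvApplyLazy node start e t z).1.getD j 0 = t.getD j 0 ∧
      (pvApplyLazy node start e t z).2.getD j 0 = z.getD j 0) ∧
    (∀ fuel, (e - start).toNat < fuel →
      pvVals fuel node start e (pvApplyLazy node start e t z).1
        (pvApplyLazy node start e t z).2 = pvVals fuel node start e t z) := by
  have hnode4 : node < 4*N := pvOK_node_lt N node start e hOK
  by_cases hb : 0 < z.getD node 0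
  case neg =>
    unfold pvApplyLazy
    rw [if_neg hb]
    exact ⟨ht, hz, hNN, by show z.getD node 0 = 0; have := hNN node; omega, fun j _ => ⟨rfl, rfl⟩, fun fuel _ => rfl⟩
  case pos =>
    by_cases he : start = e
    · -- leaf: the pending lazy is folded into the stored value and cleared
      unfold pvApplyLazy
      rw [if_pos hb, if_neg (not_not_intro he)]
      simp only
      refine ⟨by simp [ht], by simp [hz], ?_, ?_, ?_, ?_⟩
      · intro j
        by_cases hj : j = node
        · subst hj; rw [pv_getD_set_self z j 0 (by omega)]
        · rw [pv_getD_set_ne z node j 0 (by omega)]; exact hNN j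
      · rw [pv_getD_set_self z node 0 (by omega)]
      · intro j hj
        have hjn : j ≠ node := by
          intro hh; subst hh; rw [pvIsDesc_self] at hj; simp at hj
        exact ⟨pv_getD_set_ne t node j _ (by omega), pv_getD_set_ne z node j _ (by omega)⟩
      · intro fuel hf
        match fuel with
        | fuel + 1 =>
          unfold pvVals
          rw [if_pos he, if_pos he]
          rw [pv_getD_set_self z node 0 (by omega), pv_getD_set_self t node _ (by omega),
            pvGmax_nonpos _ _ (by omega), pvGmax_pos _ _ hb]
    · -- internal: the lazy is folded into the stored value and pushed to both children
      have hlt : start < e := lt_of_le_of_ne hse he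
      obtain ⟨hcb, hokl, hokr⟩ := pvOK_step N node start e hOK hlt
      unfold pvApplyLazy
      rw [if_pos hb, if_pos he]
      simp only
      have hne1 : (2*node+1) ≠ node := by omega
      have hne2 : (2*node+2) ≠ node := by omega
      have hne12 : (2*node+1) ≠ (2*node+2) := by omega
      have hl1n : (z.set (2*node+1) (max (z.getD (2*node+1) 0) (z.getD node 0))).getD node 0
          = z.getD node 0 := pv_getD_set_ne z _ node _ hne1
      have hl12 : (z.set (2*node+1) (max (z.getD (2*node+1) 0) (z.getD node 0))).getD (2*node+2) 0
          = z.getD (2*node+2) 0 := pv_getD_set_ne z _ _ _ hne12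
      set a1 := max (z.getD (2*node+1) 0) (z.getD node 0) with ha1
      set z1 := z.set (2*node+1) a1 with hz1def
      set a2 := max (z1.getD (2*node+2) 0) (z1.getD node 0) with ha2
      set z2 := z1.set (2*node+2) a2 with hz2def
      have hz1len : z1.length = 4*N := by simp [hz1def, hz]
      have hz2len : z2.length = 4*N := by simp [hz2def, hz1len]
      have ha2' : a2 = max (z.getD (2*node+2) 0) (z.getD node 0) := by
        rw [ha2, hz1def, ha1, pv_getD_set_ne z _ _ _ hne12, pv_getD_set_ne z _ _ _ hne1]
      -- final lazy entries
      have hgnode : (z2.set node 0).getD node 0 = 0 :=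
        pv_getD_set_self z2 node 0 (by omega)
      have hg1 : (z2.set node 0).getD (2*node+1) 0 = max (z.getD (2*node+1) 0) (z.getD node 0) := by
        rw [pv_getD_set_ne z2 node _ 0 (Ne.symm hne1), hz2def,
          pv_getD_set_ne z1 _ _ _ (Ne.symm hne12), hz1def,
          pv_getD_set_self z _ _ (by omega), ha1]
      have hg2 : (z2.set node 0).getD (2*node+2) 0 = max (z.getD (2*node+2) 0) (z.getD node 0) := by
        rw [pv_getD_set_ne z2 node _ 0 (Ne.symm hne2), hz2def,
          pv_getD_set_self z1 _ _ (by omega), ha2']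
      have hgother : ∀ j, j ≠ node → j ≠ 2*node+1 → j ≠ 2*node+2 →
          (z2.set node 0).getD j 0 = z.getD j 0 := by
        intro j hjn hj1 hj2
        rw [pv_getD_set_ne z2 node j 0 (Ne.symm hjn), hz2def,
          pv_getD_set_ne z1 _ j _ (Ne.symm hj2), hz1def,
          pv_getD_set_ne z _ j _ (Ne.symm hj1)]
      refine ⟨by simp [ht], by simp [hz2len], ?_, hgnode, ?_, ?_⟩
      · intro j
        by_cases hjn : j = node
        · subst hjn; rw [hgnode]
        · by_cases hj1 : j = 2*node+1
          · subst hj1; rw [hg1]; have := hNN (2*node+1); exact le_max_of_le_left this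
          · by_cases hj2 : j = 2*node+2
            · subst hj2; rw [hg2]; have := hNN (2*node+2); exact le_max_of_le_left this
            · rw [hgother j hjn hj1 hj2]; exact hNN j
      · intro j hj
        have hjn : j ≠ node := by
          intro hh; subst hh; rw [pvIsDesc_self] at hj; simp at hj
        have hj1 : j ≠ 2*node+1 := by
          intro hh; subst hh; rw [pvIsDesc_left] at hj; simp at hj
        have hj2 : j ≠ 2*node+2 := by
          intro hh; subst hh; rw [pvIsDesc_right] at hj; simp at hj
        exact ⟨pv_getD_set_ne t node j _ (Ne.symm hjn), hgother j hjn hj1 hj2⟩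
      · intro fuel hf
        match fuel with
        | fuel + 1 =>
          unfold pvVals
          rw [if_neg he, if_neg he]
          simp only [pv_mid start e hse]
          have hm1 : start ≤ (start + e) / 2 := by omega
          have hm2 : (start + e) / 2 < e := by omega
          rw [hgnode]
          -- left child: restricted to its subtree the new state is z bumped at 2*node+1
          have hL : pvVals fuel (2*node+1) start ((start+e)/2)
              (t.set node (max (t.getD node 0) (z.getD node 0))) (z2.set node 0) =
              pvVals fuel (2*node+1) start ((start+e)/2) t
                (z.set (2*node+1) (max (z.getD (2*node+1) 0) (z.getD node 0))) := by
            apply pvVals_congr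
            · intro j hjd
              have := pvIsDesc_le _ _ hjd
              exact pv_getD_set_ne t node j _ (by omega)
            · intro j hjd
              have hjn : j ≠ node := by have := pvIsDesc_le _ _ hjd; omega
              have hj2 : j ≠ 2*node+2 := by
                intro hh; subst hh
                exact pvIsDesc_disjoint node _ hjd (pvIsDesc_self _)
              by_cases hj1 : j = 2*node+1
              · subst hj1
                rw [hg1, pv_getD_set_self z _ _ (by omega)]
              · rw [hgother j hjn hj1 hj2, pv_getD_set_ne z _ j _ (Ne.symm hj1)]
          have hR : pvVals fuel (2*node+2) ((start+e)/2+1) e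
              (t.set node (max (t.getD node 0) (z.getD node 0))) (z2.set node 0) =
              pvVals fuel (2*node+2) ((start+e)/2+1) e t
                (z.set (2*node+2) (max (z.getD (2*node+2) 0) (z.getD node 0))) := by
            apply pvVals_congr
            · intro j hjd
              have := pvIsDesc_le _ _ hjd
              exact pv_getD_set_ne t node j _ (by omega)
            · intro j hjd
              have hjn : j ≠ node := by have := pvIsDesc_le _ _ hjd; omega
              have hj1 : j ≠ 2*node+1 := by
                intro hh; subst hh
                exact pvIsDesc_disjoint node _ (pvIsDesc_self _) hjd
              by_cases hj2 : j = 2*node+2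
              · subst hj2
                rw [hg2, pv_getD_set_self z _ _ (by omega)]
              · rw [hgother j hjn hj1 hj2, pv_getD_set_ne z _ j _ (Ne.symm hj2)]
          rw [hL, hR,
            pvVals_bump fuel (2*node+1) start ((start+e)/2) t z (z.getD node 0) h0 hm1
              (by omega) (by omega) (by omega) (hNN _),
            pvVals_bump fuel (2*node+2) ((start+e)/2+1) e t z (z.getD node 0) (by omega)
              (by omega) (by omega) (by omega) (by omega) (hNN _)]
          rw [← List.map_append]
          rw [List.map_congr_left (fun x _ => pvGmax_nonpos 0 x (by omega)), List.map_id']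

theorem pvGmax_zero (x : Int) : pvGmax 0 x = x := by simp [pvGmax]

theorem pv_bool_ne_false {b : Bool} (h : ¬ b = false) : b = true := by
  cases b <;> simp_all

theorem pvRangeUpdate_spec (N node : Nat) (start e : Int) (t z : List Int) (v : Int)
    (ht : t.length = 4*N) (hz : z.length = 4*N) (hOK : pvOK N node start e)
    (h0 : 0 ≤ start) (hse : start ≤ e) (hNN : ∀ j, 0 ≤ z.getD j 0) (hv : 0 ≤ v) :
    (pvRangeUpdate v node start e t z).1.length = 4*N ∧
    (pvRangeUpdate v node start e t z).2.length = 4*N ∧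
    (∀ j, 0 ≤ (pvRangeUpdate v node start e t z).2.getD j 0) ∧
    (∀ fuel, (e - start).toNat < fuel →
      pvVals fuel node start e (pvRangeUpdate v node start e t z).1
          (pvRangeUpdate v node start e t z).2 =
        if start = e then pvVals fuel node start e t z
        else (pvVals fuel node start e t z).map (pvGmax v)) := by
  have hnode4 : node < 4*N := pvOK_node_lt N node start e hOK
  by_cases he : start = e
  · unfold pvRangeUpdate
    rw [if_neg (not_not_intro he)]
    exact ⟨ht, hz, hNN, fun fuel _ => by rw [if_pos he]⟩
  · unfold pvRangeUpdate
    rw [if_pos he]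
    simp only
    refine ⟨by simp [ht], by simp [hz], ?_, ?_⟩
    · intro j
      by_cases hj : j = node
      · subst hj; rw [pv_getD_set_self z j _ (by omega)]
        exact le_max_of_le_left (hNN j)
      · rw [pv_getD_set_ne z node j _ (by omega)]; exact hNN j
    · intro fuel hf
      rw [if_neg he]
      match fuel with
      | fuel + 1 =>
        unfold pvVals
        rw [if_neg he, if_neg he]
        simp only [pv_mid start e hse]
        rw [pv_getD_set_self z node _ (by omega)]
        have hcl : pvVals fuel (2*node+1) start ((start+e)/2)
            (t.set node (max (t.getD node 0) v)) (z.set node (max (z.getD node 0) v)) =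
            pvVals fuel (2*node+1) start ((start+e)/2) t z := by
          apply pvVals_congr <;>
            (intro j hjd; have := pvIsDesc_le _ _ hjd;
             exact pv_getD_set_ne _ node j _ (by omega))
        have hcr : pvVals fuel (2*node+2) ((start+e)/2 + 1) e
            (t.set node (max (t.getD node 0) v)) (z.set node (max (z.getD node 0) v)) =
            pvVals fuel (2*node+2) ((start+e)/2 + 1) e t z := by
          apply pvVals_congr <;>
            (intro j hjd; have := pvIsDesc_le _ _ hjd;
             exact pv_getD_set_ne _ node j _ (by omega))
        rw [hcl, hcr, List.map_map]
        apply List.map_congr_left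
        intro x _
        exact (pvGmax_comp _ _ x (hNN node) hv).symm

theorem pvUpdate_spec (N : Nat) (idx v : Int) : ∀ (fuel : Nat) (node : Nat) (start e : Int)
    (t z : List Int), t.length = 4*N → z.length = 4*N → pvOK N node start e →
    0 ≤ start → start ≤ e → (e - start).toNat < fuel → start ≤ idx → idx ≤ e →
    (∀ j, 0 ≤ z.getD j 0) →
    (pvUpdate idx v fuel node start e t z).1.length = 4*N ∧
    (pvUpdate idx v fuel node start e t z).2.length = 4*N ∧
    (∀ j, 0 ≤ (pvUpdate idx v fuel node start e t z).2.getD j 0) ∧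
    (∀ j, pvIsDesc node j = false →
      (pvUpdate idx v fuel node start e t z).1.getD j 0 = t.getD j 0 ∧
      (pvUpdate idx v fuel node start e t z).2.getD j 0 = z.getD j 0) ∧
    (∀ fuel', (e - start).toNat < fuel' →
      pvVals fuel' node start e (pvUpdate idx v fuel node start e t z).1
          (pvUpdate idx v fuel node start e t z).2 =
        (pvVals fuel' node start e t z).set (idx - start).toNat v) := by
  intro fuel
  induction fuel with
  | zero => intro node start e t z _ _ _ _ _ hf; omega
  | succ fuel ih =>
    intro node start e t z ht hz hOK h0 hse hf hi1 hi2 hNN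
    have hnode4 : node < 4*N := pvOK_node_lt N node start e hOK
    obtain ⟨al1, al2, al3, al4, al5, al6⟩ :=
      pvApplyLazy_spec N node start e t z ht hz hOK h0 hse hNN
    set AL := pvApplyLazy node start e t z with hAL
    by_cases he : start = e
    · unfold pvUpdate
      rw [if_pos he]
      simp only [← hAL]
      have hidx0 : (idx - start).toNat = 0 := by omega
      refine ⟨by simp [al1], al2, al3, ?_, ?_⟩
      · intro j hj
        have hjn : j ≠ node := by
          intro hh; subst hh; rw [pvIsDesc_self] at hj; simp at hj
        exact ⟨by rw [pv_getD_set_ne _ node j _ (by omega)]; exact (al5 j hj).1, (al5 j hj).2⟩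
      · intro fuel' hf'
        match fuel' with
        | fuel' + 1 =>
          rw [← al6 (fuel'+1) hf']
          unfold pvVals
          rw [if_pos he, if_pos he, hidx0]
          rw [al4]
          simp only [pvGmax_zero]
          rw [pv_getD_set_self AL.1 node v (by rw [al1]; omega), List.set_cons_zero]
    · have hlt : start < e := lt_of_le_of_ne hse he
      obtain ⟨hcb, hokl, hokr⟩ := pvOK_step N node start e hOK hlt
      have hm1 : start ≤ (start + e) / 2 := by omega
      have hm2 : (start + e) / 2 < e := by omega
      unfold pvUpdate
      rw [if_neg he]
      simp only [pv_mid start e hse, ← hAL]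
      by_cases hbr : start ≤ idx ∧ idx ≤ (start + e) / 2
      · rw [if_pos hbr]
        obtain ⟨u1, u2, u3, u5, u6⟩ := ih (2*node+1) start ((start+e)/2) AL.1 AL.2
          al1 al2 hokl h0 hm1 (by omega) hbr.1 hbr.2 al3
        set U := pvUpdate idx v fuel (2*node+1) start ((start+e)/2) AL.1 AL.2 with hU
        refine ⟨by simp [u1], u2, u3, ?_, ?_⟩
        · intro j hj
          have hjn : j ≠ node := by
            intro hh; subst hh; rw [pvIsDesc_self] at hj; simp at hj
          have hjl : pvIsDesc (2*node+1) j = false := by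
            by_contra hh
            rw [pvIsDesc_of_left node j (pv_bool_ne_false hh)] at hj; simp at hj
          refine ⟨?_, by rw [(u5 j hjl).2]; exact (al5 j hj).2⟩
          rw [pv_getD_set_ne _ node j _ (by omega), (u5 j hjl).1]
          exact (al5 j hj).1
        · intro fuel' hf'
          match fuel' with
          | fuel' + 1 =>
            rw [← al6 (fuel'+1) hf']
            unfold pvVals
            rw [if_neg he, if_neg he]
            simp only [pv_mid start e hse]
            have hznode : U.2.getD node 0 = 0 := by
              rw [(u5 node (pvIsDesc_not_node_left node)).2, al4]
            rw [hznode, al4]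
            rw [List.map_congr_left (fun x _ => pvGmax_zero x), List.map_id',
              List.map_congr_left (fun x _ => pvGmax_zero x), List.map_id']
            have hL : pvVals fuel' (2*node+1) start ((start+e)/2)
                (U.1.set node (min (U.1.getD (2*node+1) 0) (U.1.getD (2*node+2) 0))) U.2 =
                (pvVals fuel' (2*node+1) start ((start+e)/2) AL.1 AL.2).set
                  (idx - start).toNat v := by
              rw [pvVals_congr fuel' (2*node+1) start ((start+e)/2) _ _ U.1 U.2
                (fun j hjd => pv_getD_set_ne _ node j _
                  (by have := pvIsDesc_le _ _ hjd; omega))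
                (fun _ _ => rfl)]
              exact u6 fuel' (by omega)
            have hR : pvVals fuel' (2*node+2) ((start+e)/2+1) e
                (U.1.set node (min (U.1.getD (2*node+1) 0) (U.1.getD (2*node+2) 0))) U.2 =
                pvVals fuel' (2*node+2) ((start+e)/2+1) e AL.1 AL.2 := by
              apply pvVals_congr
              · intro j hjd
                have hjn : j ≠ node := by have := pvIsDesc_le _ _ hjd; omega
                have hjl : pvIsDesc (2*node+1) j = false := by
                  by_contra hh
                  exact pvIsDesc_disjoint node j (pv_bool_ne_false hh) hjd
                rw [pv_getD_set_ne _ node j _ (by omega), (u5 j hjl).1]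
              · intro j hjd
                have hjl : pvIsDesc (2*node+1) j = false := by
                  by_contra hh
                  exact pvIsDesc_disjoint node j (pv_bool_ne_false hh) hjd
                exact (u5 j hjl).2
            rw [hL, hR]
            rw [List.set_append_left _ _ (by
              rw [pvVals_len fuel' (2*node+1) start ((start+e)/2) _ _ h0 hm1 (by omega)]
              omega)]
      · rw [if_neg hbr]
        have hir : (start+e)/2 + 1 ≤ idx := by omega
        obtain ⟨u1, u2, u3, u5, u6⟩ := ih (2*node+2) ((start+e)/2+1) e AL.1 AL.2
          al1 al2 hokr (by omega) (by omega) (by omega) hir hi2 al3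
        set U := pvUpdate idx v fuel (2*node+2) ((start+e)/2+1) e AL.1 AL.2 with hU
        refine ⟨by simp [u1], u2, u3, ?_, ?_⟩
        · intro j hj
          have hjn : j ≠ node := by
            intro hh; subst hh; rw [pvIsDesc_self] at hj; simp at hj
          have hjr : pvIsDesc (2*node+2) j = false := by
            by_contra hh
            have hht : pvIsDesc (2*node+2) j = true := by
              revert hh; cases pvIsDesc (2*node+2) j <;> simp
            rw [pvIsDesc_of_right node j hht] at hj; simp at hj
          refine ⟨?_, by rw [(u5 j hjr).2]; exact (al5 j hj).2⟩
          rw [pv_getD_set_ne _ node j _ (by omega), (u5 j hjr).1]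
          exact (al5 j hj).1
        · intro fuel' hf'
          match fuel' with
          | fuel' + 1 =>
            rw [← al6 (fuel'+1) hf']
            unfold pvVals
            rw [if_neg he, if_neg he]
            simp only [pv_mid start e hse]
            have hznode : U.2.getD node 0 = 0 := by
              rw [(u5 node (pvIsDesc_not_node_right node)).2, al4]
            rw [hznode, al4]
            rw [List.map_congr_left (fun x _ => pvGmax_zero x), List.map_id',
              List.map_congr_left (fun x _ => pvGmax_zero x), List.map_id']
            have hL : pvVals fuel' (2*node+1) start ((start+e)/2)
                (U.1.set node (min (U.1.getD (2*node+1) 0) (U.1.getD (2*node+2) 0))) U.2 =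
                pvVals fuel' (2*node+1) start ((start+e)/2) AL.1 AL.2 := by
              apply pvVals_congr
              · intro j hjd
                have hjn : j ≠ node := by have := pvIsDesc_le _ _ hjd; omega
                have hjr : pvIsDesc (2*node+2) j = false := by
                  by_contra hh
                  exact pvIsDesc_disjoint node j hjd (pv_bool_ne_false hh)
                rw [pv_getD_set_ne _ node j _ (by omega), (u5 j hjr).1]
              · intro j hjd
                have hjr : pvIsDesc (2*node+2) j = false := by
                  by_contra hh
                  exact pvIsDesc_disjoint node j hjd (pv_bool_ne_false hh)
                exact (u5 j hjr).2
            have hR : pvVals fuel' (2*node+2) ((start+e)/2+1) e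
                (U.1.set node (min (U.1.getD (2*node+1) 0) (U.1.getD (2*node+2) 0))) U.2 =
                (pvVals fuel' (2*node+2) ((start+e)/2+1) e AL.1 AL.2).set
                  (idx - ((start+e)/2+1)).toNat v := by
              rw [pvVals_congr fuel' (2*node+2) ((start+e)/2+1) e _ _ U.1 U.2
                (fun j hjd => pv_getD_set_ne _ node j _
                  (by have := pvIsDesc_le _ _ hjd; omega))
                (fun _ _ => rfl)]
              exact u6 fuel' (by omega)
            rw [hL, hR]
            rw [List.set_append_right _ _ (by
              rw [pvVals_len fuel' (2*node+1) start ((start+e)/2) _ _ h0 hm1 (by omega)]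
              omega)]
            have harith : ∀ L : Nat, L = ((start+e)/2 - start + 1).toNat →
                (idx - start).toNat - L = (idx - ((start+e)/2+1)).toNat := by
              intro L hL'; omega
            rw [pvVals_len fuel' (2*node+1) start ((start+e)/2) AL.1 AL.2 h0 hm1 (by omega),
              harith _ rfl]

theorem pv_getD_append_right (l1 l2 : List Int) (k : Nat) :
    (l1 ++ l2).getD (l1.length + k) 0 = l2.getD k 0 := by
  simp [List.getD, List.getElem?_append_right]

theorem pvGetUtil_spec (N : Nat) (idx : Int) : ∀ (fuel : Nat) (node : Nat) (start e : Int)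
    (t z : List Int), t.length = 4*N → z.length = 4*N → pvOK N node start e →
    0 ≤ start → start ≤ e → (e - start).toNat < fuel → start ≤ idx → idx ≤ e →
    (∀ j, 0 ≤ z.getD j 0) →
    (pvGetUtil idx fuel node start e t z).2.1.length = 4*N ∧
    (pvGetUtil idx fuel node start e t z).2.2.length = 4*N ∧
    (∀ j, 0 ≤ (pvGetUtil idx fuel node start e t z).2.2.getD j 0) ∧
    (∀ j, pvIsDesc node j = false →
      (pvGetUtil idx fuel node start e t z).2.1.getD j 0 = t.getD j 0 ∧
      (pvGetUtil idx fuel node start e t z).2.2.getD j 0 = z.getD j 0) ∧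
    (∀ fuel', (e - start).toNat < fuel' →
      pvVals fuel' node start e (pvGetUtil idx fuel node start e t z).2.1
        (pvGetUtil idx fuel node start e t z).2.2 = pvVals fuel' node start e t z) ∧
    (∀ fuel', (e - start).toNat < fuel' →
      (pvGetUtil idx fuel node start e t z).1 =
        (pvVals fuel' node start e t z).getD (idx - start).toNat 0) := by
  intro fuel
  induction fuel with
  | zero => intro node start e t z _ _ _ _ _ hf; omega
  | succ fuel ih =>
    intro node start e t z ht hz hOK h0 hse hf hi1 hi2 hNN
    have hnode4 : node < 4*N := pvOK_node_lt N node start e hOK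
    obtain ⟨al1, al2, al3, al4, al5, al6⟩ :=
      pvApplyLazy_spec N node start e t z ht hz hOK h0 hse hNN
    set AL := pvApplyLazy node start e t z with hAL
    by_cases he : start = e
    · unfold pvGetUtil
      rw [if_pos he]
      simp only [← hAL]
      have hidx0 : (idx - start).toNat = 0 := by omega
      refine ⟨al1, al2, al3, al5, al6, ?_⟩
      intro fuel' hf'
      match fuel' with
      | fuel' + 1 =>
        rw [← al6 (fuel'+1) hf']
        unfold pvVals
        rw [if_pos he, hidx0, al4]
        simp only [pvGmax_zero, List.getD_cons_zero]
    · have hlt : start < e := lt_of_le_of_ne hse he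
      obtain ⟨hcb, hokl, hokr⟩ := pvOK_step N node start e hOK hlt
      have hm1 : start ≤ (start + e) / 2 := by omega
      have hm2 : (start + e) / 2 < e := by omega
      unfold pvGetUtil
      rw [if_neg he]
      simp only [pv_mid start e hse, ← hAL]
      by_cases hbr : start ≤ idx ∧ idx ≤ (start + e) / 2
      · rw [if_pos hbr]
        obtain ⟨u1, u2, u3, u5, u6, u7⟩ := ih (2*node+1) start ((start+e)/2) AL.1 AL.2
          al1 al2 hokl h0 hm1 (by omega) hbr.1 hbr.2 al3
        set U := pvGetUtil idx fuel (2*node+1) start ((start+e)/2) AL.1 AL.2 with hU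
        have hfr : ∀ j, pvIsDesc node j = false →
            U.2.1.getD j 0 = t.getD j 0 ∧ U.2.2.getD j 0 = z.getD j 0 := by
          intro j hj
          have hjl : pvIsDesc (2*node+1) j = false := by
            by_contra hh
            rw [pvIsDesc_of_left node j (pv_bool_ne_false hh)] at hj; simp at hj
          exact ⟨by rw [(u5 j hjl).1]; exact (al5 j hj).1,
            by rw [(u5 j hjl).2]; exact (al5 j hj).2⟩
        have hznode : U.2.2.getD node 0 = 0 := by
          rw [(u5 node (pvIsDesc_not_node_left node)).2, al4]
        have hvalsR : ∀ fuel', pvVals fuel' (2*node+2) ((start+e)/2+1) e U.2.1 U.2.2 =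
            pvVals fuel' (2*node+2) ((start+e)/2+1) e AL.1 AL.2 := by
          intro fuel'
          apply pvVals_congr
          · intro j hjd
            have hjl : pvIsDesc (2*node+1) j = false := by
              by_contra hh
              exact pvIsDesc_disjoint node j (pv_bool_ne_false hh) hjd
            exact (u5 j hjl).1
          · intro j hjd
            have hjl : pvIsDesc (2*node+1) j = false := by
              by_contra hh
              exact pvIsDesc_disjoint node j (pv_bool_ne_false hh) hjd
            exact (u5 j hjl).2
        have hvals : ∀ fuel', (e - start).toNat < fuel' →
            pvVals fuel' node start e U.2.1 U.2.2 = pvVals fuel' node start e t z := by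
          intro fuel' hf'
          match fuel' with
          | fuel' + 1 =>
            rw [← al6 (fuel'+1) hf']
            unfold pvVals
            rw [if_neg he, if_neg he]
            simp only [pv_mid start e hse]
            rw [hznode, al4, u6 fuel' (by omega), hvalsR fuel']
        refine ⟨u1, u2, u3, hfr, hvals, ?_⟩
        intro fuel' hf'
        match fuel' with
        | fuel' + 1 =>
          rw [← al6 (fuel'+1) hf']
          unfold pvVals
          rw [if_neg he]
          simp only [pv_mid start e hse]
          rw [al4]
          rw [List.map_congr_left (fun x _ => pvGmax_zero x), List.map_id']
          rw [List.getD_append _ _ 0 _ (by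
            rw [pvVals_len fuel' (2*node+1) start ((start+e)/2) _ _ h0 hm1 (by omega)]
            omega)]
          exact u7 fuel' (by omega)
      · rw [if_neg hbr]
        have hir : (start+e)/2 + 1 ≤ idx := by omega
        obtain ⟨u1, u2, u3, u5, u6, u7⟩ := ih (2*node+2) ((start+e)/2+1) e AL.1 AL.2
          al1 al2 hokr (by omega) (by omega) (by omega) hir hi2 al3
        set U := pvGetUtil idx fuel (2*node+2) ((start+e)/2+1) e AL.1 AL.2 with hU
        have hfr : ∀ j, pvIsDesc node j = false →
            U.2.1.getD j 0 = t.getD j 0 ∧ U.2.2.getD j 0 = z.getD j 0 := by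
          intro j hj
          have hjr : pvIsDesc (2*node+2) j = false := by
            by_contra hh
            rw [pvIsDesc_of_right node j (pv_bool_ne_false hh)] at hj; simp at hj
          exact ⟨by rw [(u5 j hjr).1]; exact (al5 j hj).1,
            by rw [(u5 j hjr).2]; exact (al5 j hj).2⟩
        have hznode : U.2.2.getD node 0 = 0 := by
          rw [(u5 node (pvIsDesc_not_node_right node)).2, al4]
        have hvalsL : ∀ fuel', pvVals fuel' (2*node+1) start ((start+e)/2) U.2.1 U.2.2 =
            pvVals fuel' (2*node+1) start ((start+e)/2) AL.1 AL.2 := by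
          intro fuel'
          apply pvVals_congr
          · intro j hjd
            have hjr : pvIsDesc (2*node+2) j = false := by
              by_contra hh
              exact pvIsDesc_disjoint node j hjd (pv_bool_ne_false hh)
            exact (u5 j hjr).1
          · intro j hjd
            have hjr : pvIsDesc (2*node+2) j = false := by
              by_contra hh
              exact pvIsDesc_disjoint node j hjd (pv_bool_ne_false hh)
            exact (u5 j hjr).2
        have hvals : ∀ fuel', (e - start).toNat < fuel' →
            pvVals fuel' node start e U.2.1 U.2.2 = pvVals fuel' node start e t z := by
          intro fuel' hf'
          match fuel' with
          | fuel' + 1 =>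
            rw [← al6 (fuel'+1) hf']
            unfold pvVals
            rw [if_neg he, if_neg he]
            simp only [pv_mid start e hse]
            rw [hznode, al4, u6 fuel' (by omega), hvalsL fuel']
        refine ⟨u1, u2, u3, hfr, hvals, ?_⟩
        intro fuel' hf'
        match fuel' with
        | fuel' + 1 =>
          rw [← al6 (fuel'+1) hf']
          unfold pvVals
          rw [if_neg he]
          simp only [pv_mid start e hse]
          rw [al4]
          rw [List.map_congr_left (fun x _ => pvGmax_zero x), List.map_id']
          have hsplit : (idx - start).toNat =
              (pvVals fuel' (2*node+1) start ((start+e)/2) AL.1 AL.2).length +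
                (idx - ((start+e)/2+1)).toNat := by
            rw [pvVals_len fuel' (2*node+1) start ((start+e)/2) _ _ h0 hm1 (by omega)]
            omega
          rw [hsplit, pv_getD_append_right]
          exact u7 fuel' (by omega)

def pvSlice (price : List Int) (start e : Int) : List Int :=
  (List.range (e - start + 1).toNat).map (fun k => price.getD (start.toNat + k) 0)

theorem pv_pyGetD_toNat (l : List Int) (i : Int) (h0 : 0 ≤ i) (h1 : i < l.length) :
    PySem.List.pyGetD l i 0 = l.getD i.toNat 0 := by
  rw [PySem.List.pyGetD_eq_getElem (xs := l) (d := 0) h0 h1, List.getD_eq_getElem]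

theorem pvSlice_split (price : List Int) (start m e : Int)
    (h0 : 0 ≤ start) (h1 : start ≤ m) (h2 : m < e) :
    pvSlice price start e = pvSlice price start m ++ pvSlice price (m+1) e := by
  unfold pvSlice
  have hn : (e - start + 1).toNat = (m - start + 1).toNat + (e - (m+1) + 1).toNat := by omega
  rw [hn, List.range_add, List.map_append, List.map_map]
  congr 1
  apply List.map_congr_left
  intro k hk
  simp only [Function.comp_apply]
  have harith : start.toNat + ((m - start + 1).toNat + k) = (m+1).toNat + k := by omega
  rw [harith]

theorem pvBuild_spec (N : Nat) (price : List Int) : ∀ (fuel : Nat) (node : Nat)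
    (start e : Int) (t : List Int), t.length = 4*N → pvOK N node start e →
    0 ≤ start → start ≤ e → e < (price.length : Int) → (e - start).toNat < fuel →
    (pvBuild price fuel node start e t).length = 4*N ∧
    (∀ j, pvIsDesc node j = false →
      (pvBuild price fuel node start e t).getD j 0 = t.getD j 0) ∧
    (∀ z, (∀ j, z.getD j 0 = 0) → ∀ fuel', (e - start).toNat < fuel' →
      pvVals fuel' node start e (pvBuild price fuel node start e t) z =
        pvSlice price start e) := by
  intro fuel
  induction fuel with
  | zero => intro node start e t _ _ _ _ _ hf; omega
  | succ fuel ih =>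
    intro node start e t ht hOK h0 hse hel hf
    have hnode4 : node < 4*N := pvOK_node_lt N node start e hOK
    by_cases he : start = e
    · unfold pvBuild
      rw [if_pos he]
      refine ⟨by simp [ht], ?_, ?_⟩
      · intro j hj
        have hjn : j ≠ node := by
          intro hh; subst hh; rw [pvIsDesc_self] at hj; simp at hj
        exact pv_getD_set_ne t node j _ (by omega)
      · intro z hz0 fuel' hf'
        match fuel' with
        | fuel' + 1 =>
          unfold pvVals
          rw [if_pos he, hz0 node]
          simp only [pvGmax_zero]
          rw [pv_getD_set_self t node _ (by omega),
            pv_pyGetD_toNat price start h0 (by omega)]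
          unfold pvSlice
          have h1 : (e - start + 1).toNat = 1 := by omega
          rw [h1, List.range_one, List.map_cons, List.map_nil, Nat.add_zero]
    · have hlt : start < e := lt_of_le_of_ne hse he
      obtain ⟨hcb, hokl, hokr⟩ := pvOK_step N node start e hOK hlt
      have hm1 : start ≤ (start + e) / 2 := by omega
      have hm2 : (start + e) / 2 < e := by omega
      unfold pvBuild
      rw [if_neg he]
      simp only [pv_mid start e hse]
      obtain ⟨b1, b2, b3⟩ := ih (2*node+1) start ((start+e)/2) t ht hokl h0 hm1
        (by omega) (by omega)
      set T1 := pvBuild price fuel (2*node+1) start ((start+e)/2) t with hT1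
      obtain ⟨c1, c2, c3⟩ := ih (2*node+2) ((start+e)/2+1) e T1 b1 hokr (by omega)
        (by omega) hel (by omega)
      set T2 := pvBuild price fuel (2*node+2) ((start+e)/2+1) e T1 with hT2
      refine ⟨by simp [c1], ?_, ?_⟩
      · intro j hj
        have hjn : j ≠ node := by
          intro hh; subst hh; rw [pvIsDesc_self] at hj; simp at hj
        have hjl : pvIsDesc (2*node+1) j = false := by
          by_contra hh
          rw [pvIsDesc_of_left node j (pv_bool_ne_false hh)] at hj; simp at hj
        have hjr : pvIsDesc (2*node+2) j = false := by
          by_contra hh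
          rw [pvIsDesc_of_right node j (pv_bool_ne_false hh)] at hj; simp at hj
        rw [pv_getD_set_ne T2 node j _ (by omega), c2 j hjr, b2 j hjl]
      · intro z hz0 fuel' hf'
        match fuel' with
        | fuel' + 1 =>
          unfold pvVals
          rw [if_neg he]
          simp only [pv_mid start e hse]
          rw [hz0 node]
          rw [List.map_congr_left (fun x _ => pvGmax_zero x), List.map_id']
          have hL : pvVals fuel' (2*node+1) start ((start+e)/2) (T2.set node
              (min (T2.getD (2*node+1) 0) (T2.getD (2*node+2) 0))) z =
              pvVals fuel' (2*node+1) start ((start+e)/2) T1 z := by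
            apply pvVals_congr
            · intro j hjd
              have hjn : j ≠ node := by have := pvIsDesc_le _ _ hjd; omega
              have hjr : pvIsDesc (2*node+2) j = false := by
                by_contra hh
                exact pvIsDesc_disjoint node j hjd (pv_bool_ne_false hh)
              rw [pv_getD_set_ne T2 node j _ (by omega), c2 j hjr]
            · intro _ _; rfl
          have hR : pvVals fuel' (2*node+2) ((start+e)/2+1) e (T2.set node
              (min (T2.getD (2*node+1) 0) (T2.getD (2*node+2) 0))) z =
              pvVals fuel' (2*node+2) ((start+e)/2+1) e T2 z := by
            apply pvVals_congr
            · intro j hjd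
              have hjn : j ≠ node := by have := pvIsDesc_le _ _ hjd; omega
              rw [pv_getD_set_ne T2 node j _ (by omega)]
            · intro _ _; rfl
          rw [hL, hR, b3 z hz0 fuel' (by omega), c3 z hz0 fuel' (by omega),
            ← pvSlice_split price start ((start+e)/2) e h0 hm1 hm2]

-- forward one-query specification of A (floors are dropped on a single-leaf tree)
def pvStepF (vals : List Int) (q : List Int) : List Int :=
  if PySem.List.pyGetD q 0 0 = 1 then
    vals.set (PySem.List.pyGetD q 1 0 - 1).toNat (PySem.List.pyGetD q 2 0)
  else if PySem.List.pyGetD q 0 0 = 2 then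
    (if 1 < vals.length then vals.map (fun x => max x (PySem.List.pyGetD q 1 0)) else vals)
  else vals

-- forward one-query specification of B (floors always apply)
def pvStep2 (vals : List Int) (q : List Int) : List Int :=
  if PySem.List.pyGetD q 0 0 = 1 then
    vals.set (PySem.List.pyGetD q 1 0 - 1).toNat (PySem.List.pyGetD q 2 0)
  else if PySem.List.pyGetD q 0 0 = 2 then
    vals.map (fun x => max x (PySem.List.pyGetD q 1 0))
  else vals

-- the part of Pre_ about a single query
def pvPreQ (n : Nat) (q : List Int) : Prop :=
  (PySem.List.pyGetD q 0 0 = 1 →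
    1 ≤ PySem.List.pyGetD q 1 0 ∧ PySem.List.pyGetD q 1 0 ≤ (n : Int)) ∧
  (PySem.List.pyGetD q 0 0 = 2 → 1 ≤ PySem.List.pyGetD q 1 0)

theorem pvLoop_spec (N : Nat) (hN : 1 ≤ N) : ∀ (qs : List (List Int)) (t z vals0 : List Int),
    (∀ q ∈ qs, pvPreQ N q) → t.length = 4*N → z.length = 4*N →
    (∀ j, 0 ≤ z.getD j 0) → pvVals N 0 0 ((N : Int) - 1) t z = vals0 →
    (qs.foldl (pvDoQuery N) (t, z)).1.length = 4*N ∧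
    (qs.foldl (pvDoQuery N) (t, z)).2.length = 4*N ∧
    (∀ j, 0 ≤ (qs.foldl (pvDoQuery N) (t, z)).2.getD j 0) ∧
    pvVals N 0 0 ((N : Int) - 1) (qs.foldl (pvDoQuery N) (t, z)).1
      (qs.foldl (pvDoQuery N) (t, z)).2 = qs.foldl pvStepF vals0 := by
  intro qs
  induction qs with
  | nil => intro t z vals0 _ ht hz hNN hv; exact ⟨ht, hz, hNN, hv⟩
  | cons q qs ih =>
    intro t z vals0 hq ht hz hNN hv
    have hlen0 : vals0.length = N := by
      rw [← hv, pvVals_len N 0 0 ((N:Int)-1) t z (by omega) (by omega) (by omega)]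
      omega
    have hfe : (((N:Int)-1) - 0).toNat < N := by omega
    simp only [List.foldl_cons]
    have hq0 := hq q (List.mem_cons_self)
    by_cases h1 : PySem.List.pyGetD q 0 0 = 1
    · obtain ⟨hx1, hx2⟩ := hq0.1 h1
      have hstep : pvDoQuery N (t, z) q =
          pvUpdate (PySem.List.pyGetD q 1 0 - 1) (PySem.List.pyGetD q 2 0) N 0 0
            ((N:Int)-1) t z := by
        unfold pvDoQuery; rw [if_pos h1]
      obtain ⟨u1, u2, u3, _, u6⟩ := pvUpdate_spec N (PySem.List.pyGetD q 1 0 - 1)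
        (PySem.List.pyGetD q 2 0) N 0 0 ((N:Int)-1) t z ht hz (pvOK_root N hN)
        (by omega) (by omega) hfe (by omega) (by omega) hNN
      rw [hstep]
      refine ih _ _ _ (fun p hp => hq p (List.mem_cons_of_mem q hp)) u1 u2 u3 ?_
      rw [u6 N hfe, hv]
      have hstepF : pvStepF vals0 q =
          vals0.set (PySem.List.pyGetD q 1 0 - 1).toNat (PySem.List.pyGetD q 2 0) := by
        unfold pvStepF; rw [if_pos h1]
      rw [hstepF, sub_zero]
    · by_cases h2 : PySem.List.pyGetD q 0 0 = 2
      · have hx1 := hq0.2 h2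
        have hstep : pvDoQuery N (t, z) q =
            pvRangeUpdate (PySem.List.pyGetD q 1 0) 0 0 ((N:Int)-1) t z := by
          unfold pvDoQuery; rw [if_neg h1, if_pos h2]
        obtain ⟨u1, u2, u3, u4⟩ := pvRangeUpdate_spec N 0 0 ((N:Int)-1) t z
          (PySem.List.pyGetD q 1 0) ht hz (pvOK_root N hN) (by omega) (by omega) hNN
          (by omega)
        rw [hstep]
        refine ih (pvRangeUpdate (PySem.List.pyGetD q 1 0) 0 0 ((N:Int)-1) t z).1
          (pvRangeUpdate (PySem.List.pyGetD q 1 0) 0 0 ((N:Int)-1) t z).2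
          _ (fun p hp => hq p (List.mem_cons_of_mem q hp)) u1 u2 u3 ?_
        rw [u4 N hfe, hv]
        have hstepF : pvStepF vals0 q =
            (if 1 < vals0.length then
              vals0.map (fun x => max x (PySem.List.pyGetD q 1 0)) else vals0) := by
          unfold pvStepF; rw [if_neg h1, if_pos h2]
        rw [hstepF]
        by_cases hone : (0:Int) = (N:Int) - 1
        · rw [if_pos hone, if_neg (by omega)]
        · rw [if_neg hone, if_pos (by omega)]
          apply List.map_congr_left
          intro x _
          exact pvGmax_pos _ x (by omega)
      · have hstep : pvDoQuery N (t, z) q = (t, z) := by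
          unfold pvDoQuery; rw [if_neg h1, if_neg h2]
        have hstepF : pvStepF vals0 q = vals0 := by
          unfold pvStepF; rw [if_neg h1, if_neg h2]
        rw [hstep, hstepF]
        exact ih t z vals0 (fun p hp => hq p (List.mem_cons_of_mem q hp)) ht hz hNN hv

theorem pvGetPrices_aux (N : Nat) (hN : 1 ≤ N) (vals0 : List Int) :
    ∀ (is : List Nat) (out t z : List Int),
    (∀ i ∈ is, i < N) → t.length = 4*N → z.length = 4*N → (∀ j, 0 ≤ z.getD j 0) →
    pvVals N 0 0 ((N : Int) - 1) t z = vals0 →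
    (is.foldl (pvReadStep N N) (out, t, z)).1 =
      out ++ is.map (fun i => vals0.getD i 0) := by
  intro is
  induction is with
  | nil => intro out t z _ _ _ _ _; simp
  | cons i is ih =>
    intro out t z his ht hz hNN hv
    have hiN : i < N := his i (List.mem_cons_self)
    have hfe : (((N:Int)-1) - 0).toNat < N := by omega
    simp only [List.foldl_cons]
    obtain ⟨u1, u2, u3, _, u6, u7⟩ := pvGetUtil_spec N (i : Int) N 0 0 ((N:Int)-1) t z
      ht hz (pvOK_root N hN) (by omega) (by omega) hfe (by omega) (by omega) hNN
    have hstep : pvReadStep N N (out, t, z) i =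
        (out ++ [(pvGetUtil (i : Int) N 0 0 ((N:Int)-1) t z).1],
         (pvGetUtil (i : Int) N 0 0 ((N:Int)-1) t z).2.1,
         (pvGetUtil (i : Int) N 0 0 ((N:Int)-1) t z).2.2) := rfl
    rw [hstep, ih _ _ _ (fun p hp => his p (List.mem_cons_of_mem i hp)) u1 u2 u3
      (by rw [u6 N hfe, hv])]
    rw [u7 N hfe, hv]
    have hidx : ((i : Int) - 0).toNat = i := by omega
    rw [hidx, List.map_cons, List.append_assoc, List.singleton_append]

-- combined final read of B's state against a base list
def pvCombine (n : Nat) (base : List Int) (res : List (Option Int)) (fl : Option Int) :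
    List Int :=
  (List.range n).map (fun i =>
    match res.getD i none with
    | some r => r
    | none => match fl with
      | none => base.getD i 0
      | some f => max (base.getD i 0) f)

theorem pv_getD_map_max (base : List Int) (v : Int) (p : Nat) (hp : p < base.length) :
    (base.map (fun x => max x v)).getD p 0 = max (base.getD p 0) v := by
  simp [List.getD, List.getElem?_map, List.getElem?_eq_getElem hp]

theorem pv_getD_set_opt_ne (l : List (Option Int)) (i j : Nat) (v : Option Int) (h : i ≠ j) :
    (l.set i v).getD j none = l.getD j none := by
  simp [List.getD, List.getElem?_set_ne h]

theorem pv_getD_set_opt_self (l : List (Option Int)) (i : Nat) (v : Option Int)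
    (h : i < l.length) : (l.set i v).getD i none = v := by
  simp [List.getD, h]

theorem pvAltStep_combine (n : Nat) (base : List Int) (res : List (Option Int))
    (fl : Option Int) (q : List Int) (hq : pvPreQ n q) (hres : res.length = n)
    (hbase : base.length = n) :
    pvCombine n base (pvAltStep n (res, fl) q).1 (pvAltStep n (res, fl) q).2 =
      pvCombine n (pvStep2 base q) res fl := by
  by_cases h1 : PySem.List.pyGetD q 0 0 = 1
  · obtain ⟨hx1, hx2⟩ := hq.1 h1
    have hi0 : ¬ (PySem.List.pyGetD q 1 0 - 1 < 0) := by omega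
    have hstep : pvAltStep n (res, fl) q =
        (match res.getD (PySem.List.pyGetD q 1 0 - 1).toNat none with
         | none => (res.set (PySem.List.pyGetD q 1 0 - 1).toNat
             (some (match fl with
               | none => PySem.List.pyGetD q 2 0
               | some f => max (PySem.List.pyGetD q 2 0) f)), fl)
         | some _ => (res, fl)) := by
      unfold pvAltStep
      rw [if_pos h1]
      simp only [if_neg hi0]
    have hs2 : pvStep2 base q =
        base.set (PySem.List.pyGetD q 1 0 - 1).toNat (PySem.List.pyGetD q 2 0) := by
      unfold pvStep2; rw [if_pos h1]
    set j := (PySem.List.pyGetD q 1 0 - 1).toNat with hj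
    have hjn : j < n := by omega
    rw [hstep, hs2]
    cases hr : res.getD j none with
    | some r =>
      simp only [hr]
      unfold pvCombine
      apply List.map_congr_left
      intro p hp
      have hpn : p < n := List.mem_range.mp hp
      by_cases hpj : p = j
      · rw [hpj, hr]
      · cases hrp : res.getD p none with
        | some _ => rfl
        | none =>
          rw [pv_getD_set_ne base j p _ (fun hh => hpj hh.symm)]
    | none =>
      simp only [hr]
      unfold pvCombine
      apply List.map_congr_left
      intro p hp
      have hpn : p < n := List.mem_range.mp hp
      by_cases hpj : p = j
      · rw [hpj, pv_getD_set_opt_self res j _ (by omega), hr,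
          pv_getD_set_self base j _ (by omega)]
      · rw [pv_getD_set_opt_ne res j p _ (fun hh => hpj hh.symm)]
        cases hrp : res.getD p none with
        | some _ => rfl
        | none =>
          rw [pv_getD_set_ne base j p _ (fun hh => hpj hh.symm)]
  · by_cases h2 : PySem.List.pyGetD q 0 0 = 2
    · have hstep : pvAltStep n (res, fl) q =
          (res, some (match fl with
            | none => PySem.List.pyGetD q 1 0
            | some f => max f (PySem.List.pyGetD q 1 0))) := by
        unfold pvAltStep; rw [if_neg h1, if_pos h2]
      have hs2 : pvStep2 base q = base.map (fun x => max x (PySem.List.pyGetD q 1 0)) := by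
        unfold pvStep2; rw [if_neg h1, if_pos h2]
      rw [hstep, hs2]
      unfold pvCombine
      apply List.map_congr_left
      intro p hp
      have hpn : p < n := List.mem_range.mp hp
      cases hrp : res.getD p none with
      | some _ => rfl
      | none =>
        cases fl with
        | none =>
          simp only
          rw [pv_getD_map_max base _ p (by omega)]
        | some f =>
          simp only
          rw [pv_getD_map_max base _ p (by omega), max_comm f (PySem.List.pyGetD q 1 0),
            ← max_assoc]
    · have hstep : pvAltStep n (res, fl) q = (res, fl) := by
        unfold pvAltStep; rw [if_neg h1, if_neg h2]
      have hs2 : pvStep2 base q = base := by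
        unfold pvStep2; rw [if_neg h1, if_neg h2]
      rw [hstep, hs2]

theorem pvStep2_len (vals q : List Int) : (pvStep2 vals q).length = vals.length := by
  unfold pvStep2; split_ifs <;> simp

theorem pvStepF_len (vals q : List Int) : (pvStepF vals q).length = vals.length := by
  unfold pvStepF; split_ifs <;> simp

theorem pvFold2_len (qs : List (List Int)) : ∀ vals : List Int,
    (qs.foldl pvStep2 vals).length = vals.length := by
  induction qs with
  | nil => intro vals; rfl
  | cons q qs ih => intro vals; rw [List.foldl_cons, ih, pvStep2_len]

theorem pvFoldF_len (qs : List (List Int)) : ∀ vals : List Int,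
    (qs.foldl pvStepF vals).length = vals.length := by
  induction qs with
  | nil => intro vals; rfl
  | cons q qs ih => intro vals; rw [List.foldl_cons, ih, pvStepF_len]

theorem pvAltStep_len (n : Nat) (st : List (Option Int) × Option Int) (q : List Int) :
    (pvAltStep n st q).1.length = st.1.length := by
  unfold pvAltStep
  split_ifs <;> simp only
  · cases st.1.getD _ none <;> simp

theorem pvB_inv (n : Nat) : ∀ (qs : List (List Int)), (∀ q ∈ qs, pvPreQ n q) →
    (qs.reverse.foldl (pvAltStep n) (List.replicate n none, none)).1.length = n ∧
    (∀ base : List Int, base.length = n →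
      pvCombine n base (qs.reverse.foldl (pvAltStep n) (List.replicate n none, none)).1
        (qs.reverse.foldl (pvAltStep n) (List.replicate n none, none)).2 =
      qs.foldl pvStep2 base) := by
  intro qs
  induction qs with
  | nil =>
    intro _
    refine ⟨by simp, ?_⟩
    intro base hbase
    unfold pvCombine
    simp only [List.reverse_nil, List.foldl_nil]
    rw [← hbase]
    have hrepl : ∀ p : Nat, (List.replicate base.length (none : Option Int)).getD p none
        = none := by
      intro p
      simp only [List.getD, List.getElem?_replicate]
      split <;> rfl
    calc (List.range base.length).map (fun i =>
          match (List.replicate base.length (none : Option Int)).getD i none with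
          | some r => r
          | none => match (none : Option Int) with
            | none => base.getD i 0
            | some f => max (base.getD i 0) f)
        = (List.range base.length).map (fun i => base.getD i 0) := by
          apply List.map_congr_left
          intro p _
          rw [hrepl p]
      _ = base := pv_range_map_getD base
  | cons q qs ih =>
    intro hq
    obtain ⟨ih1, ih2⟩ := ih (fun p hp => hq p (List.mem_cons_of_mem q hp))
    have hrw : (q :: qs).reverse.foldl (pvAltStep n) (List.replicate n none, none) =
        pvAltStep n (qs.reverse.foldl (pvAltStep n) (List.replicate n none, none)) q := by
      rw [List.reverse_cons, List.foldl_concat]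
    rw [hrw]
    refine ⟨by rw [pvAltStep_len, ih1], ?_⟩
    intro base hbase
    have hq0 := hq q (List.mem_cons_self)
    calc pvCombine n base (pvAltStep n
          (qs.reverse.foldl (pvAltStep n) (List.replicate n none, none)) q).1
          (pvAltStep n (qs.reverse.foldl (pvAltStep n) (List.replicate n none, none)) q).2
        = pvCombine n (pvStep2 base q)
            (qs.reverse.foldl (pvAltStep n) (List.replicate n none, none)).1
            (qs.reverse.foldl (pvAltStep n) (List.replicate n none, none)).2 := by
          have := pvAltStep_combine n base
            (qs.reverse.foldl (pvAltStep n) (List.replicate n none, none)).1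
            (qs.reverse.foldl (pvAltStep n) (List.replicate n none, none)).2 q hq0 ih1 hbase
          exact this
      _ = qs.foldl pvStep2 (pvStep2 base q) := ih2 _ (by rw [pvStep2_len, hbase])
      _ = (q :: qs).foldl pvStep2 base := by rw [List.foldl_cons]

theorem pvB_eq (price : List Int) (queries : List (List Int))
    (hq : ∀ q ∈ queries, pvPreQ price.length q) :
    getFinalPrice1_alt price queries = queries.foldl pvStep2 price :=
  (pvB_inv price.length queries hq).2 price rfl

theorem pvSlice_full (price : List Int) :
    pvSlice price 0 ((price.length : Int) - 1) = price := by
  unfold pvSlice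
  have h1 : ((price.length : Int) - 1 - 0 + 1).toNat = price.length := by omega
  rw [h1]
  calc (List.range price.length).map (fun k => price.getD ((0:Int).toNat + k) 0)
      = (List.range price.length).map (fun k => price.getD k 0) := by
        apply List.map_congr_left; intro k _; simp
    _ = price := pv_range_map_getD price

theorem pv_getD_replicate (n j : Nat) : (List.replicate n (0:Int)).getD j 0 = 0 := by
  simp only [List.getD, List.getElem?_replicate]
  split <;> rfl

theorem pvA_eq (price : List Int) (queries : List (List Int)) (hp : price ≠ [])
    (hq : ∀ q ∈ queries, pvPreQ price.length q) :
    getFinalPrice1 price queries = queries.foldl pvStepF price := by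
  have hN : 1 ≤ price.length := by
    cases price with
    | nil => simp at hp
    | cons a l => simp
  have hfe : (((price.length : Int) - 1) - 0).toNat < price.length := by omega
  obtain ⟨b1, _, b3⟩ := pvBuild_spec price.length price price.length 0 0
    ((price.length : Int) - 1) (List.replicate (4*price.length) 0)
    (by simp) (pvOK_root price.length hN) (by omega) (by omega) (by omega) (by omega)
  have hz0 : ∀ j, (List.replicate (4*price.length) (0:Int)).getD j 0 = 0 :=
    fun j => pv_getD_replicate _ j
  have hvals0 : pvVals price.length 0 0 ((price.length : Int) - 1)
      (pvBuild price price.length 0 0 ((price.length : Int) - 1)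
        (List.replicate (4*price.length) 0))
      (List.replicate (4*price.length) 0) = price := by
    rw [b3 (List.replicate (4*price.length) 0) hz0 price.length (by omega), pvSlice_full]
  obtain ⟨l1, l2, l3, l4⟩ := pvLoop_spec price.length hN queries
    (pvBuild price price.length 0 0 ((price.length : Int) - 1)
      (List.replicate (4*price.length) 0))
    (List.replicate (4*price.length) 0) price hq b1 (by simp)
    (fun j => by rw [hz0 j]) hvals0
  have hlenF : (queries.foldl pvStepF price).length = price.length := pvFoldF_len _ _
  have hgp := pvGetPrices_aux price.length hN (queries.foldl pvStepF price)
    (List.range price.length) []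
    (queries.foldl (pvDoQuery price.length) (pvBuild price price.length 0 0
      ((price.length : Int) - 1) (List.replicate (4*price.length) 0),
      List.replicate (4*price.length) 0)).1
    (queries.foldl (pvDoQuery price.length) (pvBuild price price.length 0 0
      ((price.length : Int) - 1) (List.replicate (4*price.length) 0),
      List.replicate (4*price.length) 0)).2
    (fun i hi => List.mem_range.mp hi) l1 l2 l3 l4
  show pvGetPrices price.length price.length _ _ = _
  unfold pvGetPrices
  rw [hgp, List.nil_append]
  calc (List.range price.length).map (fun i => (queries.foldl pvStepF price).getD i 0)
      = (List.range (queries.foldl pvStepF price).length).map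
          (fun i => (queries.foldl pvStepF price).getD i 0) := by rw [hlenF]
    _ = queries.foldl pvStepF price := pv_range_map_getD _

theorem pvFold_ge2 (qs : List (List Int)) : ∀ vals : List Int, 2 ≤ vals.length →
    qs.foldl pvStepF vals = qs.foldl pvStep2 vals := by
  induction qs with
  | nil => intro vals _; rfl
  | cons q qs ih =>
    intro vals hlen
    rw [List.foldl_cons, List.foldl_cons]
    have hstep : pvStepF vals q = pvStep2 vals q := by
      unfold pvStepF pvStep2
      split_ifs with h1 h2 h3 <;> first | rfl | omega
    rw [hstep]
    exact ih (pvStep2 vals q) (by rw [pvStep2_len]; omega)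

-- single-element case: bridges for the PySem accessors
theorem pv_py0 (q : List Int) : PySem.List.pyGetD q 0 0 = q.getD 0 0 := by simp [pysem]

theorem pv_py1 (q : List Int) : PySem.List.pyGetD q 1 0 = q.getD 1 0 := by simp [pysem]

theorem pv_py2 (q : List Int) : PySem.List.pyGetD q 2 0 = q.getD 2 0 := by simp [pysem]

theorem pv_getD_concat (qs : List (List Int)) (q : List Int) :
    (qs ++ [q]).getD qs.length [] = q := by simp [List.getD]

theorem pv_getD_append_lt (qs : List (List Int)) (q : List Int) (k : Nat)
    (h : k < qs.length) : (qs ++ [q]).getD k [] = qs.getD k [] := by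
  simp [List.getD, List.getElem?_append_left h]

theorem pvStep2_case1 (w q : List Int) (h : PySem.List.pyGetD q 0 0 = 1) :
    pvStep2 w q = w.set (PySem.List.pyGetD q 1 0 - 1).toNat (PySem.List.pyGetD q 2 0) := by
  unfold pvStep2; rw [if_pos h]

theorem pvStep2_case2 (w q : List Int) (h1 : ¬ PySem.List.pyGetD q 0 0 = 1)
    (h2 : PySem.List.pyGetD q 0 0 = 2) :
    pvStep2 w q = w.map (fun x => max x (PySem.List.pyGetD q 1 0)) := by
  unfold pvStep2; rw [if_neg h1, if_pos h2]

theorem pvStep2_case3 (w q : List Int) (h1 : ¬ PySem.List.pyGetD q 0 0 = 1)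
    (h2 : ¬ PySem.List.pyGetD q 0 0 = 2) : pvStep2 w q = w := by
  unfold pvStep2; rw [if_neg h1, if_neg h2]

theorem pvStepF_case1 (w q : List Int) (h : PySem.List.pyGetD q 0 0 = 1) :
    pvStepF w q = w.set (PySem.List.pyGetD q 1 0 - 1).toNat (PySem.List.pyGetD q 2 0) := by
  unfold pvStepF; rw [if_pos h]

theorem pvStepF_case2 (w q : List Int) (h1 : ¬ PySem.List.pyGetD q 0 0 = 1)
    (h2 : PySem.List.pyGetD q 0 0 = 2) :
    pvStepF w q = (if 1 < w.length then
      w.map (fun x => max x (PySem.List.pyGetD q 1 0)) else w) := by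
  unfold pvStepF; rw [if_neg h1, if_pos h2]

theorem pvStepF_case3 (w q : List Int) (h1 : ¬ PySem.List.pyGetD q 0 0 = 1)
    (h2 : ¬ PySem.List.pyGetD q 0 0 = 2) : pvStepF w q = w := by
  unfold pvStepF; rw [if_neg h1, if_neg h2]

-- the value A's (and, absent a live floor, B's) single element ends at
def pvBase (a : Int) (qs : List (List Int)) : Int :=
  qs.foldl (fun b q => if PySem.List.pyGetD q 0 0 = 1 then PySem.List.pyGetD q 2 0 else b) a

-- the D_ condition on the queries, price[0] abstracted
def pvDCond (a : Int) (qs : List (List Int)) : Prop :=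
  ∃ i < qs.length, qs[i]!.getD 0 0 = 2 ∧
    (∀ p ∈ qs.drop (i+1), p.getD 0 0 ≠ 1) ∧
    ((qs.filter (·.getD 0 0 == 1)).map (·.getD 2 0)).getLastD a < qs[i]!.getD 1 0

theorem pv_bang (qs : List (List Int)) (i : Nat) (h : i < qs.length) :
    qs[i]! = qs.getD i [] := by
  rw [getElem!_pos qs i h, List.getD_eq_getElem _ _ h]

theorem pv_filter_skip (q : List Int) (h : q.getD 0 0 ≠ 1) :
    [q].filter (·.getD 0 0 == 1) = [] := by
  simp only [List.filter_cons, List.filter_nil]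
  rw [if_neg]
  simp only [List.getD] at h
  simp [h]

theorem pv_filter_keep (q : List Int) (h : q.getD 0 0 = 1) :
    [q].filter (·.getD 0 0 == 1) = [q] := by
  simp only [List.filter_cons, List.filter_nil]
  rw [if_pos]
  simp only [List.getD] at h
  simp [h]

theorem pvBase_concat (a : Int) (qs : List (List Int)) (q : List Int) :
    pvBase a (qs ++ [q]) =
      if PySem.List.pyGetD q 0 0 = 1 then PySem.List.pyGetD q 2 0 else pvBase a qs := by
  unfold pvBase
  rw [List.foldl_concat]

-- pvBase is the last point-set value, or the initial value if there is none
theorem pvBase_eq (qs : List (List Int)) : ∀ a : Int,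
    pvBase a qs = ((qs.filter (·.getD 0 0 == 1)).map (·.getD 2 0)).getLastD a := by
  induction qs using List.reverseRecOn with
  | nil => intro a; rfl
  | append_singleton qs q ih =>
    intro a
    rw [pvBase_concat, List.filter_append]
    by_cases h1 : PySem.List.pyGetD q 0 0 = 1
    · rw [if_pos h1, pv_filter_keep q (by rw [← pv_py0]; exact h1), List.map_append,
        List.map_cons, List.map_nil, List.getLastD_concat, pv_py2]
    · rw [if_neg h1, pv_filter_skip q (by rw [← pv_py0]; exact h1), List.append_nil, ih]

theorem pvDCond_extend (a : Int) (qs : List (List Int)) (q : List Int)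
    (htype : q.getD 0 0 ≠ 1) (hd : pvDCond a qs) : pvDCond a (qs ++ [q]) := by
  obtain ⟨i, hi, h2, h3, h4⟩ := hd
  have hfil : (qs ++ [q]).filter (·.getD 0 0 == 1) = qs.filter (·.getD 0 0 == 1) := by
    rw [List.filter_append, pv_filter_skip q htype, List.append_nil]
  refine ⟨i, by simp; omega, ?_, ?_, ?_⟩
  · rw [pv_bang _ i (by simp; omega), pv_getD_append_lt qs q i hi, ← pv_bang _ i hi]
    exact h2
  · rw [List.drop_append_of_le_length (by omega)]
    intro p hp
    rcases List.mem_append.mp hp with hin | hin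
    · exact h3 p hin
    · rw [List.mem_singleton.mp hin]; exact htype
  · rw [hfil, pv_bang _ i (by simp; omega), pv_getD_append_lt qs q i hi, ← pv_bang _ i hi]
    exact h4

theorem pvDCond_new_floor (a : Int) (qs : List (List Int)) (q : List Int)
    (h2 : q.getD 0 0 = 2) (hgt : pvBase a qs < q.getD 1 0) :
    pvDCond a (qs ++ [q]) := by
  have hq1 : q.getD 0 0 ≠ 1 := by omega
  have hbang : (qs ++ [q])[qs.length]! = q := by
    rw [pv_bang _ _ (by simp), pv_getD_concat]
  refine ⟨qs.length, by simp, by rw [hbang]; exact h2, ?_, ?_⟩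
  · rw [show qs.length + 1 = (qs ++ [q]).length by simp, List.drop_length]
    intro p hp; simp at hp
  · rw [hbang, List.filter_append, pv_filter_skip q hq1, List.append_nil, ← pvBase_eq]
    exact hgt

-- A's forward fold on a single element always lands on pvBase (floors are dropped)
theorem pvFoldF_one (qs : List (List Int)) : ∀ a : Int, (∀ q ∈ qs, pvPreQ 1 q) →
    qs.foldl pvStepF [a] = [pvBase a qs] := by
  induction qs with
  | nil => intro a _; rfl
  | cons q qs ih =>
    intro a hq
    have hq0 := hq q (List.mem_cons_self)
    have hbase : pvBase a (q :: qs) =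
        pvBase (if PySem.List.pyGetD q 0 0 = 1 then PySem.List.pyGetD q 2 0 else a) qs := by
      unfold pvBase
      rw [List.foldl_cons]
    rw [List.foldl_cons, hbase]
    by_cases h1 : PySem.List.pyGetD q 0 0 = 1
    · obtain ⟨hx1, hx2⟩ := hq0.1 h1
      have hxx : PySem.List.pyGetD q 1 0 = 1 := by omega
      have hF : pvStepF [a] q = [PySem.List.pyGetD q 2 0] := by
        rw [pvStepF_case1 _ _ h1, hxx]
        norm_num
      rw [hF, if_pos h1]
      exact ih _ (fun p hp => hq p (List.mem_cons_of_mem q hp))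
    · have hF : pvStepF [a] q = [a] := by
        by_cases h2 : PySem.List.pyGetD q 0 0 = 2
        · rw [pvStepF_case2 _ _ h1 h2, if_neg (by simp)]
        · rw [pvStepF_case3 _ _ h1 h2]
      rw [hF, if_neg h1]
      exact ih _ (fun p hp => hq p (List.mem_cons_of_mem q hp))

-- B's forward fold on a single element, when no live floor beats the base
theorem pvFold2_one (qs : List (List Int)) : ∀ a : Int, (∀ q ∈ qs, pvPreQ 1 q) →
    ¬ pvDCond a qs → qs.foldl pvStep2 [a] = [pvBase a qs] := by
  induction qs using List.reverseRecOn with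
  | nil => intro a _ _; rfl
  | append_singleton qs q ih =>
    intro a hq hnd
    have hq0 := hq q (by simp)
    have hqs : ∀ p ∈ qs, pvPreQ 1 p := fun p hp => hq p (by simp [hp])
    rw [List.foldl_concat, pvBase_concat]
    by_cases h1 : PySem.List.pyGetD q 0 0 = 1
    · obtain ⟨hx1, hx2⟩ := hq0.1 h1
      have hxx : PySem.List.pyGetD q 1 0 = 1 := by omega
      have hlen : (qs.foldl pvStep2 [a]).length = 1 := by rw [pvFold2_len]; rfl
      rw [pvStep2_case1 _ _ h1, hxx, if_pos h1]
      have h0 : ((1:Int) - 1).toNat = 0 := by norm_num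
      rw [h0]
      exact pv_set_len_one _ _ hlen
    · have hnd' : ¬ pvDCond a qs := fun hd =>
        hnd (pvDCond_extend a qs q (by rw [← pv_py0]; exact h1) hd)
      rw [if_neg h1]
      by_cases h2 : PySem.List.pyGetD q 0 0 = 2
      · have hvle : PySem.List.pyGetD q 1 0 ≤ pvBase a qs := by
          by_contra hgt
          apply hnd
          apply pvDCond_new_floor a qs q (by rw [← pv_py0]; exact h2)
          rw [← pv_py1]; omega
        rw [pvStep2_case2 _ _ h1 h2, ih a hqs hnd']
        simp only [List.map_cons, List.map_nil]
        rw [max_eq_left hvle]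
      · rw [pvStep2_case3 _ _ h1 h2, ih a hqs hnd']

-- B's forward fold on a single element is bounded below by any live floor
theorem pvFold2_lower (qs : List (List Int)) : ∀ (a : Int) (i : Nat), i < qs.length →
    (qs.getD i []).getD 0 0 = 2 →
    (∀ p ∈ qs.drop (i+1), p.getD 0 0 ≠ 1) →
    ∃ r, qs.foldl pvStep2 [a] = [r] ∧ (qs.getD i []).getD 1 0 ≤ r := by
  induction qs using List.reverseRecOn with
  | nil => intro a i hi; simp at hi
  | append_singleton qs q ih =>
    intro a i hi h2 h3
    have hlen : (qs.foldl pvStep2 [a]).length = 1 := by rw [pvFold2_len]; rfl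
    obtain ⟨r0, hr0⟩ := List.length_eq_one_iff.mp hlen
    rw [List.foldl_concat]
    simp only [List.length_append, List.length_cons, List.length_nil] at hi
    rcases Nat.lt_or_ge i qs.length with hilt | hige
    · have hq1 : q.getD 0 0 ≠ 1 := by
        apply h3 q
        rw [List.drop_append_of_le_length (by omega)]
        exact List.mem_append_right _ (List.mem_singleton.mpr rfl)
      obtain ⟨r, hr, hvr⟩ := ih a i hilt
        (by rw [pv_getD_append_lt qs q i hilt] at h2; exact h2)
        (by intro p hp
            apply h3 p
            rw [List.drop_append_of_le_length (by omega)]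
            exact List.mem_append_left _ hp)
      rw [pv_getD_append_lt qs q i hilt]
      by_cases hq2 : PySem.List.pyGetD q 0 0 = 2
      · refine ⟨max r (PySem.List.pyGetD q 1 0), ?_, le_max_of_le_left hvr⟩
        rw [pvStep2_case2 _ _ (by rw [pv_py0]; exact hq1) hq2, hr]
        rfl
      · refine ⟨r, ?_, hvr⟩
        rw [pvStep2_case3 _ _ (by rw [pv_py0]; exact hq1) hq2, hr]
    · have hieq : i = qs.length := by omega
      subst hieq
      rw [pv_getD_concat] at h2 ⊢
      refine ⟨max r0 (PySem.List.pyGetD q 1 0), ?_, by rw [pv_py1]; exact le_max_right _ _⟩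
      rw [pvStep2_case2 _ _ (by rw [pv_py0]; omega) (by rw [pv_py0]; exact h2), hr0]
      rfl

-- ===== VERDICT =====
theorem getFinalPrice1_spec : Claim_unchanged_getFinalPrice1 := by
  unfold Claim_unchanged_getFinalPrice1
  intro price queries _ hpre
  unfold Spec_getFinalPrice1
  intro hnd
  obtain ⟨hp, hq⟩ := hpre
  have hq' : ∀ q ∈ queries, pvPreQ price.length q := by
    intro q hqm
    obtain ⟨_, hA, hB⟩ := hq q hqm
    exact ⟨fun h1 => ⟨(hA h1).2.1, (hA h1).2.2⟩, fun h2 => (hB h2).2⟩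
  rw [pvA_eq price queries hp hq', pvB_eq price queries hq']
  rcases Nat.lt_or_ge price.length 2 with hn | hn
  · have h1 : price.length = 1 := by
      cases price with
      | nil => simp at hp
      | cons a l => simp at hn ⊢; omega
    obtain ⟨a, rfl⟩ := List.length_eq_one_iff.mp h1
    have hnf : ¬ pvDCond a queries := fun hd => hnd ⟨rfl, hd⟩
    rw [pvFoldF_one queries a hq', pvFold2_one queries a hq' hnf]
  · exact pvFold_ge2 queries price hn

theorem getFinalPrice1_changed : Claim_changed_getFinalPrice1 := by
  unfold Claim_changed_getFinalPrice1; decide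

theorem getFinalPrice1_tight : Claim_exact_getFinalPrice1 := by
  unfold Claim_exact_getFinalPrice1
  intro price queries _ hpre hd
  obtain ⟨hp, hq⟩ := hpre
  have hq' : ∀ q ∈ queries, pvPreQ price.length q := by
    intro q hqm
    obtain ⟨_, hA, hB⟩ := hq q hqm
    exact ⟨fun h1 => ⟨(hA h1).2.1, (hA h1).2.2⟩, fun h2 => (hB h2).2⟩
  obtain ⟨h1, hdc⟩ := hd
  obtain ⟨a, rfl⟩ := List.length_eq_one_iff.mp h1
  rw [pvA_eq _ queries hp hq', pvB_eq _ queries hq']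
  obtain ⟨i, hi, hc2, hc3, hc4⟩ := hdc
  rw [pv_bang _ i hi] at hc2 hc4
  obtain ⟨r, hr, hvr⟩ := pvFold2_lower queries a i hi hc2 hc3
  rw [pvFoldF_one queries a hq', hr]
  have hlt : pvBase a queries < (queries.getD i []).getD 1 0 := by
    rw [pvBase_eq]
    exact hc4
  intro heq
  have : pvBase a queries = r := by injection heq
  omega
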